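-- pv_equiv track=rewrite | github.com/erturkmemmedli/Leet-Code-Solutions | 0501-1000/0959_regionsBySlashes.py | regionsBySlashes
-- ===== SOURCE A (Python) =====
-- from typing import List
--
-- from collections import deque
--
-- def regionsBySlashes(grid: List[str]) -> int:
--     n = len(grid)
--     matrix = [[1] * 3*n for _ in range(3*n)]
--     for i, slash in enumerate(grid):
--         for j, symbol in enumerate(slash):
--             if symbol == ' ':
--                 continue
--             elif symbol == '/':
--                 matrix[3*i+2][3*j] = matrix[3*i+1][3*j+1] = matrix[3*i][3*j+2] = 0
--             elif slash[j] == '\\':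
--                 matrix[3*i][3*j] = matrix[3*i+1][3*j+1] = matrix[3*i+2][3*j+2] = 0
--     Q = deque()
--     visited = set()
--     count = 0
--     for i in range(3*n):
--         for j in range(3*n):
--             if matrix[i][j]:
--                 if (i,j) not in visited:
--                     visited.add((i,j))
--                     Q.append((i,j))
--                     while Q:
--                         row,col = Q.popleft()
--                         for r,c in [row-1,col], [row+1,col], [row,col-1], [row,col+1]:
--                             if 0 <= r < 3*n and 0 <= c < 3*n and (r,c) not in visited and matrix[r][c]:
--                                 visited.add((r,c))
--                                 Q.append((r,c))
--                     count += 1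
--     return count
-- ===== SOURCE B (Python) =====
-- def regionsBySlashes(grid):
--     n = len(grid)
--     m = 3 * n
--
--     def live(r, c):
--         row = grid[r // 3]
--         j = c // 3
--         if j >= len(row):
--             return True
--         ch = row[j]
--         if ch == '/':
--             return (r % 3, c % 3) not in ((2, 0), (1, 1), (0, 2))
--         if ch == '\\':
--             return (r % 3, c % 3) not in ((0, 0), (1, 1), (2, 2))
--         return True
--
--     parent = list(range(m * m))
--
--     def find(x):
--         while parent[x] != x:
--             x = parent[x]
--         return x
--
--     for r in range(m):
--         for c in range(m):
--             if live(r, c):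
--                 for rr, cc in ((r - 1, c), (r, c - 1)):
--                     if rr >= 0 and cc >= 0 and live(rr, cc):
--                         a = find(r * m + c)
--                         b = find(rr * m + cc)
--                         if a != b:
--                             if a < b:
--                                 a, b = b, a
--                             parent[a] = b
--     count = 0
--     for r in range(m):
--         for c in range(m):
--             if live(r, c) and parent[r * m + c] == r * m + c:
--                 count += 1
--     return count
-- ===== Notes on version B (the rewrite author's own statement) =====
-- stated objective: alternative
-- what changed: A materialises a 3n x 3n 0/1 pixel matrix and counts regions by BFS flood fill with a deque and visited set; B never builds the matrix or flood-fills: it runs a union-find over the pixels (union each live pixel with its live up/left neighbour, linking the larger root under the smaller) and counts the live pixels that remain roots.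
-- outside the precondition, e.g. on regionsBySlashes(['//']): A raises IndexError, B returns 2
import Mathlib
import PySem

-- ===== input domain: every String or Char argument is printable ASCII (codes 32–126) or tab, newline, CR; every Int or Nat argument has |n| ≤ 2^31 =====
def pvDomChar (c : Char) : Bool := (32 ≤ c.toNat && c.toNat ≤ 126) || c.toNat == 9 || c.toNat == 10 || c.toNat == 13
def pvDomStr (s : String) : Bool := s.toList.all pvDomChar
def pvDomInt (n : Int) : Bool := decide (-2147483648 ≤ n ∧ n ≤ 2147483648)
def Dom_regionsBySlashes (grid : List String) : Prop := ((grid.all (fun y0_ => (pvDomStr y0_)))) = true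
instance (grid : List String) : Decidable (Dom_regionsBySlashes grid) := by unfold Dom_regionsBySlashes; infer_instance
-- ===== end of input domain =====

-- B replaces A's materialised 3n×3n pixel matrix + BFS flood fill by a union-find
-- (disjoint-set) pass over the pixels that counts the live roots (alternative algorithm,
-- same exact result).

-- ===== PORT A =====
-- matrix[r][c] = 0.  The row index is always < 3n at call sites; a column index ≥ 3n
-- (where Python would raise IndexError, excluded by Pre_) makes List.set a no-op.
def pvSetZ (M : List (List Int)) (r c : Nat) : List (List Int) :=
  M.set r ((M.getD r []).set c 0)

-- one symbol of the grid: the three chained assignments of A, in Python's order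
def pvCellWrite (M : List (List Int)) (i j : Nat) (sym : Char) : List (List Int) :=
  if sym = ' ' then M
  else if sym = '/' then
    pvSetZ (pvSetZ (pvSetZ M (3*i+2) (3*j)) (3*i+1) (3*j+1)) (3*i) (3*j+2)
  else if sym = '\\' then
    pvSetZ (pvSetZ (pvSetZ M (3*i) (3*j)) (3*i+1) (3*j+1)) (3*i+2) (3*j+2)
  else M

-- matrix = [[1]*3n for _ in range(3n)]; the two enumerate loops (indices are ≥ 0, toNat exact)
def pvBuild (grid : List String) : List (List Int) :=
  let n := grid.length
  (PySem.List.enumerate grid 0).foldl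
    (fun M p => (PySem.List.enumerate p.2.toList 0).foldl
      (fun M q => pvCellWrite M p.1.toNat q.1.toNat q.2) M)
    (List.replicate (3*n) (List.replicate (3*n) (1:Int)))

-- matrix[r][c]; only read under 0 ≤ r,c < 3n guards
def pvGetCell (M : List (List Int)) (r c : Int) : Int :=
  PySem.List.pyGetD (PySem.List.pyGetD M r []) c 0

-- the four neighbours (row-1,col),(row+1,col),(row,col-1),(row,col+1)
def pvNbrs (p : Int × Int) : List (Int × Int) :=
  [(p.1 - 1, p.2), (p.1 + 1, p.2), (p.1, p.2 - 1), (p.1, p.2 + 1)]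

-- one neighbour test of A's while-loop body (queue: append to the right)
def pvStepA (M : List (List Int)) (m : Int)
    (st : PySem.Set (Int × Int) × List (Int × Int)) (q : Int × Int) :
    PySem.Set (Int × Int) × List (Int × Int) :=
  if 0 ≤ q.1 ∧ q.1 < m ∧ 0 ≤ q.2 ∧ q.2 < m ∧ q ∉ st.1 ∧ pvGetCell M q.1 q.2 ≠ 0 then
    (PySem.Set.add st.1 q, st.2 ++ [q])
  else st

-- 'while Q:' with popleft; the fuel only makes the loop total and never runs out at call sites
def pvBFS (M : List (List Int)) (m : Int) :
    Nat → PySem.Set (Int × Int) → List (Int × Int) → PySem.Set (Int × Int)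
  | _, visited, [] => visited
  | 0, visited, _ :: _ => visited
  | fuel + 1, visited, p :: rest =>
      let st := (pvNbrs p).foldl (pvStepA M m) (visited, rest)
      pvBFS M m fuel st.1 st.2

def regionsBySlashes (grid : List String) : Int :=
  let n := grid.length
  let matrix := pvBuild grid
  let m : Int := 3 * (n : Int)
  let st := (PySem.List.pyRange 0 m 1).foldl (fun st i =>
      (PySem.List.pyRange 0 m 1).foldl (fun st j =>
        if pvGetCell matrix i j ≠ 0 then
          if (i, j) ∉ st.1 then
            (pvBFS matrix m (2 * (3*n) * (3*n) + 1) (PySem.Set.add st.1 (i, j)) [(i, j)],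
             st.2 + 1)
          else st
        else st) st)
    ((PySem.Set.empty : PySem.Set (Int × Int)), (0 : Int))
  st.2

-- ===== PORT B =====
-- live(r, c) of Source B; r, c are only used with 0 ≤ r,c < 3n, so r//3 indexes grid in range
def pvLiveB (grid : List String) (r c : Int) : Bool :=
  let row := (PySem.List.pyGetD grid (PySem.Int.floordiv r 3) "").toList
  let j := PySem.Int.floordiv c 3
  if PySem.List.len row ≤ j then true
  else
    let ch := PySem.List.pyGetD row j ' '    -- row[j]: 0 ≤ j < len(row) here
    if ch = '/' then
      decide ((PySem.Int.mod r 3, PySem.Int.mod c 3) ∉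
        [((2:Int),(0:Int)), ((1:Int),(1:Int)), ((0:Int),(2:Int))])
    else if ch = '\\' then
      decide ((PySem.Int.mod r 3, PySem.Int.mod c 3) ∉
        [((0:Int),(0:Int)), ((1:Int),(1:Int)), ((2:Int),(2:Int))])
    else true

-- find(x): 'while parent[x] != x: x = parent[x]'.  The fuel (= len(parent)) only makes the
-- loop total: parents strictly decrease along a chase, so it never runs out at call sites.
def pvFindF (parent : List Int) : Nat → Int → Int
  | 0, x => x
  | fuel + 1, x =>
      let p := PySem.List.pyGetD parent x 0
      if p = x then x else pvFindF parent fuel p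

def pvFind (parent : List Int) (x : Int) : Int := pvFindF parent parent.length x

-- 'a = find(..); b = find(..); if a != b: if a < b: a, b = b, a; parent[a] = b'
def pvUCore (parent : List Int) (x y : Int) : List Int :=
  let a := pvFind parent x
  let b := pvFind parent y
  if a ≠ b then
    (if a < b then PySem.List.pySetD parent b a else PySem.List.pySetD parent a b)
  else parent

-- one neighbour (rr, cc) of the union loop body
def pvUStep (grid : List String) (m : Int) (parent : List Int) (r c : Int)
    (q : Int × Int) : List Int :=
  if 0 ≤ q.1 ∧ 0 ≤ q.2 ∧ pvLiveB grid q.1 q.2 = true then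
    pvUCore parent (r * m + c) (q.1 * m + q.2)
  else parent

def regionsBySlashes_alt (grid : List String) : Int :=
  let n := grid.length
  let m : Int := 3 * (n : Int)
  let parent0 : List Int := PySem.List.pyRange 0 (m * m) 1
  let parent := (PySem.List.pyRange 0 m 1).foldl (fun par r =>
      (PySem.List.pyRange 0 m 1).foldl (fun par c =>
        if pvLiveB grid r c = true then
          [((r - 1, c) : Int × Int), (r, c - 1)].foldl
            (fun par q => pvUStep grid m par r c q) par
        else par) par) parent0
  (PySem.List.pyRange 0 m 1).foldl (fun cnt r =>
    (PySem.List.pyRange 0 m 1).foldl (fun cnt c =>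
      if pvLiveB grid r c = true ∧ PySem.List.pyGetD parent (r * m + c) 0 = r * m + c then
        cnt + 1
      else cnt) cnt) 0

-- ===== PRECONDITION & SPEC =====
-- Pre_ excludes exactly the grids on which A raises IndexError: a '/' or '\' in some row at
-- a column index ≥ len(grid) makes A write outside its 3n×3n matrix.
def Pre_regionsBySlashes (grid : List String) : Prop :=
  (grid.all (fun s => (s.toList.drop grid.length).all
    (fun c => !(c == '/') && !(c == '\\')))) = true
instance (grid : List String) : Decidable (Pre_regionsBySlashes grid) := by
  unfold Pre_regionsBySlashes; infer_instance

def pvWitness_regionsBySlashes : List String := ["/\\", " /"]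

def Spec_regionsBySlashes (grid : List String) (out : Int) : Prop := out = regionsBySlashes_alt grid
instance (grid : List String) (out : Int) : Decidable (Spec_regionsBySlashes grid out) := by unfold Spec_regionsBySlashes; infer_instance

-- ===== CLAIM (what is proved, stated in full; the proofs are below) =====
def Claim_equal_regionsBySlashes : Prop := ∀ (grid : List String), Dom_regionsBySlashes grid → Pre_regionsBySlashes grid → Spec_regionsBySlashes grid (regionsBySlashes grid)

-- ===== LEMMAS AND PROOFS =====

-- ---- the abstract pixel graph ----
def pvIn (m : Int) (p : Int × Int) : Prop := 0 ≤ p.1 ∧ p.1 < m ∧ 0 ≤ p.2 ∧ p.2 < m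

def pvAdj (live : Int × Int → Prop) (m : Int) (p q : Int × Int) : Prop :=
  pvIn m p ∧ pvIn m q ∧ live p ∧ live q ∧
    ((q.1 = p.1 - 1 ∧ q.2 = p.2) ∨ (q.1 = p.1 + 1 ∧ q.2 = p.2) ∨
     (q.1 = p.1 ∧ q.2 = p.2 - 1) ∨ (q.1 = p.1 ∧ q.2 = p.2 + 1))

def pvReach (live : Int × Int → Prop) (m : Int) (p q : Int × Int) : Prop :=
  Relation.ReflTransGen (pvAdj live m) p q

def pvClosed (live : Int × Int → Prop) (m : Int) (V : List (Int × Int)) : Prop :=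
  ∀ p ∈ V, ∀ q, pvAdj live m p q → q ∈ V

def pvLiveA (M : List (List Int)) (p : Int × Int) : Prop := pvGetCell M p.1 p.2 ≠ 0
def pvLiveP (grid : List String) (p : Int × Int) : Prop := pvLiveB grid p.1 p.2 = true

noncomputable def pvUnivFS (m : Int) : Finset (Int × Int) := Finset.Ico 0 m ×ˢ Finset.Ico 0 m

noncomputable def pvMeas (m : Int) (V : List (Int × Int)) (Q : List (Int × Int)) : Nat :=
  2 * (pvUnivFS m \ V.toFinset).card + Q.length

lemma pvAdj_of_nbr {live : Int × Int → Prop} {m p q} (hnb : q ∈ pvNbrs p)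
    (hp : pvIn m p) (hq : pvIn m q) (lp : live p) (lq : live q) : pvAdj live m p q := by
  refine ⟨hp, hq, lp, lq, ?_⟩
  simp [pvNbrs] at hnb
  rcases hnb with h | h | h | h <;> simp [h]

lemma pvNbr_of_adj {live : Int × Int → Prop} {m p q} (h : pvAdj live m p q) : q ∈ pvNbrs p := by
  obtain ⟨_, _, _, _, hd⟩ := h
  simp [pvNbrs]
  rcases hd with h | h | h | h
  · exact Or.inl (Prod.ext h.1 h.2)
  · exact Or.inr (Or.inl (Prod.ext h.1 h.2))
  · exact Or.inr (Or.inr (Or.inl (Prod.ext h.1 h.2)))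
  · exact Or.inr (Or.inr (Or.inr (Prod.ext h.1 h.2)))

lemma pvAdj_symm {live : Int × Int → Prop} {m p q} (h : pvAdj live m p q) : pvAdj live m q p := by
  obtain ⟨hp, hq, lp, lq, hd⟩ := h
  refine ⟨hq, hp, lq, lp, ?_⟩
  rcases hd with h | h | h | h
  · exact Or.inr (Or.inl ⟨by omega, by omega⟩)
  · exact Or.inl ⟨by omega, by omega⟩
  · exact Or.inr (Or.inr (Or.inr ⟨by omega, by omega⟩))
  · exact Or.inr (Or.inr (Or.inl ⟨by omega, by omega⟩))

lemma pvReach_symm {live : Int × Int → Prop} {m p q}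
    (h : pvReach live m p q) : pvReach live m q p := by
  induction h with
  | refl => exact Relation.ReflTransGen.refl
  | tail _ hadj ih => exact Relation.ReflTransGen.head (pvAdj_symm hadj) ih

lemma pvReach_mem {live m} {S : List (Int × Int)} (hcl : pvClosed live m S)
    {p x} (hp : p ∈ S) (hr : pvReach live m p x) : x ∈ S := by
  induction hr with
  | refl => exact hp
  | tail _ hadj ih => exact hcl _ ih _ hadj

lemma pvAdj_congr {l1 l2 : Int × Int → Prop} {m} (h : ∀ p, pvIn m p → (l1 p ↔ l2 p)) :
    ∀ p q, pvAdj l1 m p q ↔ pvAdj l2 m p q := by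
  intro p q
  unfold pvAdj
  constructor <;> rintro ⟨hp, hq, lp, lq, hd⟩
  · exact ⟨hp, hq, (h p hp).1 lp, (h q hq).1 lq, hd⟩
  · exact ⟨hp, hq, (h p hp).2 lp, (h q hq).2 lq, hd⟩

lemma pvReach_congr {l1 l2 : Int × Int → Prop} {m} (h : ∀ p, pvIn m p → (l1 p ↔ l2 p)) :
    ∀ p q, pvReach l1 m p q ↔ pvReach l2 m p q := by
  intro p q
  constructor <;> intro hr
  · exact Relation.ReflTransGen.mono (fun a b hab => (pvAdj_congr h a b).1 hab) hr
  · exact Relation.ReflTransGen.mono (fun a b hab => (pvAdj_congr h a b).2 hab) hr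

-- ---- characterisation of A's inner neighbour fold ----
lemma pvStepA_char (M : List (List Int)) (m : Int) (L : List (Int × Int)) :
    ∀ (V W : List (Int × Int)) (x : Int × Int),
      (x ∈ (L.foldl (pvStepA M m) (V, W)).1 ↔
        x ∈ V ∨ (x ∈ L ∧ pvIn m x ∧ pvLiveA M x)) ∧
      (x ∈ (L.foldl (pvStepA M m) (V, W)).2 ↔
        x ∈ W ∨ (x ∈ L ∧ pvIn m x ∧ pvLiveA M x ∧ x ∉ V)) := by
  induction L with
  | nil => intro V W x; simp
  | cons q L ih =>
    intro V W x
    simp only [List.foldl_cons]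
    have hstep : pvStepA M m (V, W) q =
        if 0 ≤ q.1 ∧ q.1 < m ∧ 0 ≤ q.2 ∧ q.2 < m ∧ q ∉ V ∧ pvGetCell M q.1 q.2 ≠ 0 then
          (PySem.Set.add V q, W ++ [q]) else (V, W) := rfl
    rw [hstep]
    by_cases hg : 0 ≤ q.1 ∧ q.1 < m ∧ 0 ≤ q.2 ∧ q.2 < m ∧ q ∉ V ∧ pvGetCell M q.1 q.2 ≠ 0
    · rw [if_pos hg]
      obtain ⟨h1, h2, h3, h4, h5, h6⟩ := hg
      have hPq : pvIn m q ∧ pvLiveA M q := ⟨⟨h1, h2, h3, h4⟩, h6⟩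
      constructor
      · rw [(ih _ _ x).1, PySem.Set.mem_add]
        by_cases hx : x = q
        · subst hx; simp [hPq.1, hPq.2]
        · simp [hx, List.mem_cons]
      · rw [(ih _ _ x).2, List.mem_append, PySem.Set.mem_add]
        by_cases hx : x = q
        · subst hx; simp [hPq.1, hPq.2, h5]
        · simp [hx, List.mem_cons]
    · rw [if_neg hg]
      constructor
      · rw [(ih _ _ x).1]
        by_cases hx : x = q
        · subst hx
          constructor
          · tauto
          · rintro (h | ⟨_, hin, hl⟩)
            · exact Or.inl h
            · by_cases hv : x ∈ V
              · exact Or.inl hv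
              · exact absurd ⟨hin.1, hin.2.1, hin.2.2.1, hin.2.2.2, hv, hl⟩ hg
        · simp [hx, List.mem_cons]
      · rw [(ih _ _ x).2]
        by_cases hx : x = q
        · subst hx
          constructor
          · tauto
          · rintro (h | ⟨_, hin, hl, hv⟩)
            · exact Or.inl h
            · exact absurd ⟨hin.1, hin.2.1, hin.2.2.1, hin.2.2.2, hv, hl⟩ hg
        · simp [hx, List.mem_cons]

lemma pvStepA_meas (M : List (List Int)) (m : Int) (L : List (Int × Int)) :
    ∀ (V W : List (Int × Int)),
      pvMeas m (L.foldl (pvStepA M m) (V, W)).1 (L.foldl (pvStepA M m) (V, W)).2 ≤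
        pvMeas m V W := by
  induction L with
  | nil => intro V W; exact le_refl _
  | cons q L ih =>
    intro V W
    simp only [List.foldl_cons]
    have hstep : pvStepA M m (V, W) q =
        if 0 ≤ q.1 ∧ q.1 < m ∧ 0 ≤ q.2 ∧ q.2 < m ∧ q ∉ V ∧ pvGetCell M q.1 q.2 ≠ 0 then
          (PySem.Set.add V q, W ++ [q]) else (V, W) := rfl
    rw [hstep]
    by_cases hg : 0 ≤ q.1 ∧ q.1 < m ∧ 0 ≤ q.2 ∧ q.2 < m ∧ q ∉ V ∧ pvGetCell M q.1 q.2 ≠ 0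
    · rw [if_pos hg]
      refine le_trans (ih _ _) ?_
      obtain ⟨h1, h2, h3, h4, h5, h6⟩ := hg
      have hq : q ∈ pvUnivFS m \ V.toFinset := by
        simp [pvUnivFS, Finset.mem_sdiff, Finset.mem_product, Finset.mem_Ico,
          h1, h2, h3, h4, List.mem_toFinset, h5]
      have hadd : PySem.Set.add V q = V ++ [q] := PySem.Set.add_of_not_mem h5
      unfold pvMeas
      rw [hadd]
      have hers : (pvUnivFS m \ (V ++ [q]).toFinset) = (pvUnivFS m \ V.toFinset).erase q := by
        ext y
        simp [Finset.mem_sdiff, Finset.mem_erase]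
        tauto
      rw [hers, Finset.card_erase_of_mem hq]
      have hpos : 0 < (pvUnivFS m \ V.toFinset).card := Finset.card_pos.mpr ⟨q, hq⟩
      simp only [List.length_append, List.length_cons, List.length_nil]
      omega
    · rw [if_neg hg]
      exact ih _ _

lemma pvBFS_char (M : List (List Int)) (m : Int) :
    ∀ (fuel : Nat) (V Q : List (Int × Int)),
      pvMeas m V Q ≤ fuel →
      (∀ p ∈ Q, p ∈ V) →
      (∀ p ∈ Q, pvIn m p ∧ pvLiveA M p) →
      (∀ p ∈ V, p ∉ Q → ∀ q, pvAdj (pvLiveA M) m p q → q ∈ V) →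
      (∀ x, x ∈ pvBFS M m fuel V Q ↔ x ∈ V ∨ ∃ q ∈ Q, pvReach (pvLiveA M) m q x) ∧
        pvClosed (pvLiveA M) m (pvBFS M m fuel V Q) := by
  intro fuel
  induction fuel with
  | zero =>
    intro V Q hmu hQ hQg hcl
    have hQnil : Q = [] := by
      unfold pvMeas at hmu
      cases Q with
      | nil => rfl
      | cons a t => simp at hmu
    subst hQnil
    refine ⟨fun x => by simp [pvBFS], fun p hp q hadj => hcl p hp (by simp) q hadj⟩
  | succ fuel ih =>
    intro V Q hmu hQ hQg hcl
    cases Q with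
    | nil =>
      refine ⟨fun x => by simp [pvBFS], fun p hp q hadj => hcl p hp (by simp) q hadj⟩
    | cons p rest =>
      have hchar := pvStepA_char M m (pvNbrs p)
      have hmeas := pvStepA_meas M m (pvNbrs p) V rest
      set st := (pvNbrs p).foldl (pvStepA M m) (V, rest) with hst
      have hrun : pvBFS M m (fuel+1) V (p::rest) = pvBFS M m fuel st.1 st.2 := rfl
      have hmu1 : pvMeas m V (p::rest) = pvMeas m V rest + 1 := by
        unfold pvMeas; simp only [List.length_cons]; omega
      have hmu' : pvMeas m st.1 st.2 ≤ fuel := by omega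
      have hpV : p ∈ V := hQ p (by simp)
      have hpg : pvIn m p ∧ pvLiveA M p := hQg p (by simp)
      have hm1 : ∀ x, x ∈ st.1 ↔ x ∈ V ∨ (x ∈ pvNbrs p ∧ pvIn m x ∧ pvLiveA M x) :=
        fun x => (hchar V rest x).1
      have hm2 : ∀ x, x ∈ st.2 ↔ x ∈ rest ∨ (x ∈ pvNbrs p ∧ pvIn m x ∧ pvLiveA M x ∧ x ∉ V) :=
        fun x => (hchar V rest x).2
      have hQ' : ∀ x ∈ st.2, x ∈ st.1 := by
        intro x hx
        rw [hm1]
        rcases (hm2 x).1 hx with h | h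
        · exact Or.inl (hQ x (by simp [h]))
        · exact Or.inr ⟨h.1, h.2.1, h.2.2.1⟩
      have hQg' : ∀ x ∈ st.2, pvIn m x ∧ pvLiveA M x := by
        intro x hx
        rcases (hm2 x).1 hx with h | h
        · exact hQg x (by simp [h])
        · exact ⟨h.2.1, h.2.2.1⟩
      have hcl' : ∀ a ∈ st.1, a ∉ st.2 → ∀ q, pvAdj (pvLiveA M) m a q → q ∈ st.1 := by
        intro a ha hnot q hadj
        by_cases haV : a ∈ V
        · by_cases haQ : a ∈ rest
          · exact absurd ((hm2 a).2 (Or.inl haQ)) hnot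
          · by_cases hap : a = p
            · subst hap
              exact (hm1 q).2 (Or.inr ⟨pvNbr_of_adj hadj, hadj.2.1, hadj.2.2.2.1⟩)
            · exact (hm1 q).2 (Or.inl (hcl a haV (by simp [hap, haQ]) q hadj))
        · have hnew : a ∈ pvNbrs p ∧ pvIn m a ∧ pvLiveA M a := by
            rcases (hm1 a).1 ha with h | h
            · exact absurd h haV
            · exact h
          exact absurd ((hm2 a).2 (Or.inr ⟨hnew.1, hnew.2.1, hnew.2.2, haV⟩)) hnot
      obtain ⟨ihm, ihcl⟩ := ih st.1 st.2 hmu' hQ' hQg' hcl'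
      have hadj_new : ∀ x, x ∈ pvNbrs p → pvIn m x → pvLiveA M x → pvAdj (pvLiveA M) m p x :=
        fun x hnb hin hl => pvAdj_of_nbr hnb hpg.1 hin hpg.2 hl
      constructor
      · intro x
        rw [hrun, ihm x]
        constructor
        · rintro (hx | ⟨q, hq, hreach⟩)
          · rcases (hm1 x).1 hx with h | h
            · exact Or.inl h
            · exact Or.inr ⟨p, by simp, Relation.ReflTransGen.single (hadj_new x h.1 h.2.1 h.2.2)⟩
          · rcases (hm2 q).1 hq with h | h
            · exact Or.inr ⟨q, by simp [h], hreach⟩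
            · exact Or.inr ⟨p, by simp,
                Relation.ReflTransGen.trans
                  (Relation.ReflTransGen.single (hadj_new q h.1 h.2.1 h.2.2.1)) hreach⟩
        · rintro (hx | ⟨q, hq, hreach⟩)
          · exact Or.inl ((hm1 x).2 (Or.inl hx))
          · rcases List.mem_cons.1 hq with hqp | hqr
            · subst hqp
              have hpres : q ∈ pvBFS M m fuel st.1 st.2 :=
                (ihm q).2 (Or.inl ((hm1 q).2 (Or.inl hpV)))
              have := pvReach_mem ihcl hpres hreach
              rcases (ihm x).1 this with h | h
              · exact Or.inl h
              · exact Or.inr h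
            · exact Or.inr ⟨q, (hm2 q).2 (Or.inl hqr), hreach⟩
      · rw [hrun]; exact ihcl

-- ---- the matrix A builds agrees with B's live() ----
def pvCellN (M : List (List Int)) (r c : Nat) : Int := (M.getD r []).getD c 0

def pvDim (n : Nat) (M : List (List Int)) : Prop :=
  M.length = 3*n ∧ ∀ r < 3*n, (M.getD r []).length = 3*n

def pvCK (i j : Nat) (sym : Char) (r c : Nat) : Bool :=
  (sym = '/' && ((r = 3*i+2 && c = 3*j) || (r = 3*i+1 && c = 3*j+1) || (r = 3*i && c = 3*j+2))) ||
  (sym = '\\' && ((r = 3*i && c = 3*j) || (r = 3*i+1 && c = 3*j+1) || (r = 3*i+2 && c = 3*j+2)))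

def pvKill (grid : List String) (r c : Nat) : Bool :=
  grid.zipIdx.any (fun pr =>
    pr.1.toList.zipIdx.any (fun qc => pvCK pr.2 qc.2 qc.1 r c))

lemma pvGetD_set {α : Type} (L : List α) (i j : Nat) (v d : α) :
    (L.set i v).getD j d = if i = j ∧ i < L.length then v else L.getD j d := by
  rw [List.getD_eq_getElem?_getD, List.getElem?_set, List.getD_eq_getElem?_getD]
  by_cases h : i = j
  · subst h
    by_cases hl : i < L.length
    · simp [hl]
    · simp only [hl, and_false, if_false, if_true]
      rw [List.getElem?_eq_none (by omega)]
  · simp [h]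

lemma pvDim_replicate (n : Nat) :
    pvDim n (List.replicate (3*n) (List.replicate (3*n) (1:Int))) := by
  constructor
  · simp
  · intro r hr
    rw [List.getD_eq_getElem?_getD]
    simp [hr]

lemma pvDim_setZ {n : Nat} {M : List (List Int)} (hd : pvDim n M) (r c : Nat) :
    pvDim n (pvSetZ M r c) := by
  obtain ⟨h1, h2⟩ := hd
  refine ⟨by simp [pvSetZ, h1], ?_⟩
  intro r' hr'
  unfold pvSetZ
  rw [pvGetD_set]
  by_cases h : r = r' ∧ r < M.length
  · obtain ⟨he, hlt⟩ := h
    rw [if_pos ⟨he, hlt⟩, List.length_set]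
    subst he
    exact h2 r hr'
  · rw [if_neg h]
    exact h2 r' hr'

lemma pvCellN_setZ {n : Nat} {M : List (List Int)} (hd : pvDim n M)
    {r' : Nat} (c' : Nat) (hr' : r' < 3*n) {r c : Nat} (hc : c < 3*n) :
    pvCellN (pvSetZ M r' c') r c = if r = r' ∧ c = c' then 0 else pvCellN M r c := by
  obtain ⟨h1, h2⟩ := hd
  unfold pvCellN pvSetZ
  rw [pvGetD_set]
  by_cases hrr : r' = r
  · subst hrr
    have hlt : r' < M.length := by omega
    rw [if_pos ⟨rfl, hlt⟩, pvGetD_set]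
    by_cases hcc : c' = c
    · subst hcc
      have : c' < (M.getD r' []).length := by rw [h2 r' hr']; omega
      rw [if_pos ⟨rfl, this⟩, if_pos ⟨rfl, rfl⟩]
    · have : ¬ (c' = c ∧ c' < (M.getD r' []).length) := fun h => hcc h.1
      rw [if_neg this, if_neg (fun h : r' = r' ∧ c = c' => hcc h.2.symm)]
  · have : ¬ (r' = r ∧ r' < M.length) := fun h => hrr h.1
    rw [if_neg this, if_neg (fun h : r = r' ∧ c = c' => hrr h.1.symm)]

lemma pvCellN_cellWrite {n : Nat} {M : List (List Int)} (hd : pvDim n M)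
    {i : Nat} (j : Nat) (hi : i < n) (sym : Char) {r c : Nat} (hc : c < 3*n) :
    pvCellN (pvCellWrite M i j sym) r c = if pvCK i j sym r c then 0 else pvCellN M r c := by
  unfold pvCellWrite
  by_cases h1 : sym = ' '
  · subst h1
    simp [pvCK]
  · rw [if_neg h1]
    by_cases h2 : sym = '/'
    · subst h2
      rw [if_pos rfl]
      have hd1 : pvDim n (pvSetZ M (3*i+2) (3*j)) := pvDim_setZ hd _ _
      have hd2 : pvDim n (pvSetZ (pvSetZ M (3*i+2) (3*j)) (3*i+1) (3*j+1)) := pvDim_setZ hd1 _ _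
      rw [pvCellN_setZ hd2 _ (by omega) hc, pvCellN_setZ hd1 _ (by omega) hc,
        pvCellN_setZ hd _ (by omega) hc]
      simp only [pvCK, Bool.or_eq_true, Bool.and_eq_true, decide_eq_true_eq,
        Char.reduceEq, false_and, or_false, true_and]
      split_ifs <;> first | rfl | omega
    · rw [if_neg h2]
      by_cases h3 : sym = '\\'
      · subst h3
        rw [if_pos rfl]
        have hd1 : pvDim n (pvSetZ M (3*i) (3*j)) := pvDim_setZ hd _ _
        have hd2 : pvDim n (pvSetZ (pvSetZ M (3*i) (3*j)) (3*i+1) (3*j+1)) := pvDim_setZ hd1 _ _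
        rw [pvCellN_setZ hd2 _ (by omega) hc, pvCellN_setZ hd1 _ (by omega) hc,
          pvCellN_setZ hd _ (by omega) hc]
        simp only [pvCK, Bool.or_eq_true, Bool.and_eq_true, decide_eq_true_eq,
          Char.reduceEq, false_and, false_or, true_and]
        split_ifs <;> first | rfl | omega
      · rw [if_neg h3]
        simp [pvCK, h2, h3]

lemma pvDim_cellWrite {n : Nat} {M : List (List Int)} (hd : pvDim n M)
    (i j : Nat) (sym : Char) : pvDim n (pvCellWrite M i j sym) := by
  unfold pvCellWrite
  split_ifs <;> first | exact hd | exact pvDim_setZ (pvDim_setZ (pvDim_setZ hd _ _) _ _) _ _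

lemma pvDim_rowFold {n : Nat} (i : Nat) :
    ∀ (E : List (Int × Char)) (M : List (List Int)), pvDim n M →
      pvDim n (E.foldl (fun M q => pvCellWrite M i q.1.toNat q.2) M) := by
  intro E
  induction E with
  | nil => intro M hd; exact hd
  | cons e E ih => intro M hd; exact ih _ (pvDim_cellWrite hd _ _ _)

lemma pvRowFold {n : Nat} {i : Nat} (hi : i < n) {r c : Nat} (hc : c < 3*n) :
    ∀ (cs : List Char) (s : Nat) (M : List (List Int)), pvDim n M →
      pvCellN ((PySem.List.enumerate cs (s:Int)).foldl
          (fun M q => pvCellWrite M i q.1.toNat q.2) M) r c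
        = if (cs.zipIdx s).any (fun qc => pvCK i qc.2 qc.1 r c) then 0
          else pvCellN M r c := by
  intro cs
  induction cs with
  | nil => intro s M hd; simp [PySem.List.enumerate]
  | cons ch cs ih =>
    intro s M hd
    rw [PySem.List.enumerate_cons]
    simp only [List.foldl_cons]
    have hcast : (s:Int) + 1 = ((s+1 : Nat) : Int) := by push_cast; ring
    rw [hcast, ih (s+1) _ (pvDim_cellWrite hd _ _ _)]
    simp only [Int.toNat_natCast]
    rw [pvCellN_cellWrite hd _ hi ch hc]
    cases h1 : pvCK i s ch r c <;>
      cases h2 : (cs.zipIdx (s+1)).any (fun qc => pvCK i qc.2 qc.1 r c) <;>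
        simp [h1, h2]

lemma pvGridFold {n : Nat} {r c : Nat} (hc : c < 3*n) :
    ∀ (rows : List String) (s : Nat) (M : List (List Int)), pvDim n M → s + rows.length ≤ n →
      pvCellN ((PySem.List.enumerate rows (s:Int)).foldl
          (fun M p => (PySem.List.enumerate p.2.toList 0).foldl
            (fun M q => pvCellWrite M p.1.toNat q.1.toNat q.2) M) M) r c
        = if (rows.zipIdx s).any (fun pr => pr.1.toList.zipIdx.any
            (fun qc => pvCK pr.2 qc.2 qc.1 r c)) then 0 else pvCellN M r c := by
  intro rows
  induction rows with
  | nil => intro s M hd hb; simp [PySem.List.enumerate]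
  | cons row rows ih =>
    intro s M hd hb
    rw [PySem.List.enumerate_cons]
    simp only [List.foldl_cons]
    have hcast : (s:Int) + 1 = ((s+1 : Nat) : Int) := by push_cast; ring
    have hs : s < n := by simp only [List.length_cons] at hb; omega
    rw [hcast, ih (s+1) _ (pvDim_rowFold _ _ _ hd) (by simp only [List.length_cons] at hb; omega)]
    simp only [Int.toNat_natCast]
    rw [show ((0:Int)) = ((0:Nat):Int) from rfl]
    rw [pvRowFold hs hc row.toList 0 M hd]
    cases h1 : (row.toList.zipIdx 0).any (fun qc => pvCK s qc.2 qc.1 r c) <;>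
      cases h2 : (rows.zipIdx (s+1)).any
          (fun pr => pr.1.toList.zipIdx.any (fun qc => pvCK pr.2 qc.2 qc.1 r c)) <;>
        simp [h1, h2, List.zipIdx]

lemma pvBuild_cell (grid : List String) (r c : Nat)
    (hr : r < 3*grid.length) (hc : c < 3*grid.length) :
    pvCellN (pvBuild grid) r c = if pvKill grid r c then 0 else 1 := by
  simp only [pvBuild]
  unfold pvKill
  have hgf := pvGridFold (r := r) hc grid 0 (List.replicate (3*grid.length)
      (List.replicate (3*grid.length) (1:Int))) (pvDim_replicate _) (by omega)
  simp only [Nat.cast_zero] at hgf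
  rw [hgf]
  have hinit : pvCellN (List.replicate (3*grid.length)
      (List.replicate (3*grid.length) (1:Int))) r c = 1 := by
    unfold pvCellN
    simp [List.getD_eq_getElem?_getD, hr, hc]
  rw [hinit]

lemma pvKill_iff (grid : List String) (a b : Nat) :
    pvKill grid a b = true ↔
      (b/3 < ((grid.getD (a/3) "").toList).length ∧ a/3 < grid.length ∧
        ((((grid.getD (a/3) "").toList).getD (b/3) ' ' = '/' ∧
            ((a%3 = 2 ∧ b%3 = 0) ∨ (a%3 = 1 ∧ b%3 = 1) ∨ (a%3 = 0 ∧ b%3 = 2))) ∨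
         (((grid.getD (a/3) "").toList).getD (b/3) ' ' = '\\' ∧
            ((a%3 = 0 ∧ b%3 = 0) ∨ (a%3 = 1 ∧ b%3 = 1) ∨ (a%3 = 2 ∧ b%3 = 2))))) := by
  unfold pvKill
  rw [List.any_eq_true]
  constructor
  · rintro ⟨⟨row, i⟩, hpr, hinner⟩
    rw [List.any_eq_true] at hinner
    obtain ⟨⟨ch, k⟩, hqc, hck⟩ := hinner
    rw [List.mk_mem_zipIdx_iff_getElem?] at hpr hqc
    unfold pvCK at hck
    simp only [Bool.or_eq_true, Bool.and_eq_true, decide_eq_true_eq] at hck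
    have higrid : i < grid.length := (List.getElem?_eq_some_iff.1 hpr).1
    have hrow : grid.getD i "" = row := by
      rw [List.getD_eq_getElem?_getD, hpr]; rfl
    have hklen : k < row.toList.length := (List.getElem?_eq_some_iff.1 hqc).1
    have hch : row.toList.getD k ' ' = ch := by
      rw [List.getD_eq_getElem?_getD, hqc]; rfl
    rcases hck with ⟨hsym, hpos⟩ | ⟨hsym, hpos⟩
    · have hik : i = a/3 ∧ k = b/3 ∧
          ((a%3 = 2 ∧ b%3 = 0) ∨ (a%3 = 1 ∧ b%3 = 1) ∨ (a%3 = 0 ∧ b%3 = 2)) := by omega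
      obtain ⟨hi, hk, hoff⟩ := hik
      subst hi; subst hk
      rw [hrow, hch]
      exact ⟨hklen, higrid, Or.inl ⟨hsym, hoff⟩⟩
    · have hik : i = a/3 ∧ k = b/3 ∧
          ((a%3 = 0 ∧ b%3 = 0) ∨ (a%3 = 1 ∧ b%3 = 1) ∨ (a%3 = 2 ∧ b%3 = 2)) := by omega
      obtain ⟨hi, hk, hoff⟩ := hik
      subst hi; subst hk
      rw [hrow, hch]
      exact ⟨hklen, higrid, Or.inr ⟨hsym, hoff⟩⟩
  · rintro ⟨hlen, hglen, hcase⟩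
    have h1 : grid[a/3]? = some (grid[a/3]) := List.getElem?_eq_getElem hglen
    have hg : grid.getD (a/3) "" = grid[a/3] := by
      rw [List.getD_eq_getElem?_getD, h1]; rfl
    refine ⟨(grid[a/3], a/3), ?_, ?_⟩
    · rw [List.mk_mem_zipIdx_iff_getElem?]; exact h1
    · rw [List.any_eq_true]
      have hlen' : b/3 < (grid[a/3]).toList.length := by rw [← hg]; exact hlen
      have h2 : (grid[a/3]).toList[b/3]? = some ((grid[a/3]).toList[b/3]) :=
        List.getElem?_eq_getElem hlen'
      have hch : (grid[a/3]).toList.getD (b/3) ' ' = (grid[a/3]).toList[b/3] := by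
        rw [List.getD_eq_getElem?_getD, h2]; rfl
      refine ⟨((grid[a/3]).toList[b/3], b/3), ?_, ?_⟩
      · rw [List.mk_mem_zipIdx_iff_getElem?]; exact h2
      · unfold pvCK
        simp only [Bool.or_eq_true, Bool.and_eq_true, decide_eq_true_eq]
        rw [hg, hch] at hcase
        rcases hcase with ⟨hsym, hoff⟩ | ⟨hsym, hoff⟩
        · exact Or.inl ⟨hsym, by omega⟩
        · exact Or.inr ⟨hsym, by omega⟩

lemma pvLive_iff (grid : List String) (i j : Int) (hi : 0 ≤ i) (hi' : i < 3*(grid.length:Int))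
    (hj : 0 ≤ j) (hj' : j < 3*(grid.length:Int)) :
    (pvGetCell (pvBuild grid) i j ≠ 0) ↔ pvLiveB grid i j = true := by
  obtain ⟨a, rfl⟩ : ∃ a : Nat, i = (a:Int) := ⟨i.toNat, (Int.toNat_of_nonneg hi).symm⟩
  obtain ⟨b, rfl⟩ : ∃ b : Nat, j = (b:Int) := ⟨j.toNat, (Int.toNat_of_nonneg hj).symm⟩
  have ha : a < 3*grid.length := by omega
  have hb : b < 3*grid.length := by omega
  have hL : pvGetCell (pvBuild grid) (a:Int) (b:Int) = pvCellN (pvBuild grid) a b := by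
    unfold pvGetCell pvCellN
    rw [PySem.List.pyGetD_natCast, PySem.List.pyGetD_natCast]
  rw [hL, pvBuild_cell grid a b ha hb]
  have hdiv : PySem.Int.floordiv (a:Int) 3 = ((a/3 : Nat) : Int) := by
    rw [PySem.Int.floordiv_eq_ediv_of_pos (by norm_num)]; omega
  have hjdiv : PySem.Int.floordiv (b:Int) 3 = ((b/3 : Nat) : Int) := by
    rw [PySem.Int.floordiv_eq_ediv_of_pos (by norm_num)]; omega
  have hmoda : PySem.Int.mod (a:Int) 3 = ((a%3 : Nat) : Int) := by
    rw [PySem.Int.mod_eq_emod_of_pos (by norm_num)]; omega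
  have hmodb : PySem.Int.mod (b:Int) 3 = ((b%3 : Nat) : Int) := by
    rw [PySem.Int.mod_eq_emod_of_pos (by norm_num)]; omega
  simp only [pvLiveB, hdiv, hjdiv, hmoda, hmodb, PySem.List.pyGetD_natCast, PySem.List.len_eq]
  simp only [pvKill_iff grid a b]
  have hglen : a/3 < grid.length := by omega
  have hK : ∀ K : Prop, ∀ _ : Decidable K, ((if K then (0:Int) else 1) ≠ 0 ↔ ¬K) := by
    intro K _
    split_ifs with h <;> simp [h]
  rw [hK _ _]
  have e1 : (((a%3 : Nat):Int), ((b%3 : Nat):Int)) ∈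
      [((2:Int),(0:Int)), ((1:Int),(1:Int)), ((0:Int),(2:Int))] ↔
      ((a%3 = 2 ∧ b%3 = 0) ∨ (a%3 = 1 ∧ b%3 = 1) ∨ (a%3 = 0 ∧ b%3 = 2)) := by
    simp only [List.mem_cons, List.not_mem_nil, or_false, Prod.mk.injEq]
    omega
  have e2 : (((a%3 : Nat):Int), ((b%3 : Nat):Int)) ∈
      [((0:Int),(0:Int)), ((1:Int),(1:Int)), ((2:Int),(2:Int))] ↔
      ((a%3 = 0 ∧ b%3 = 0) ∨ (a%3 = 1 ∧ b%3 = 1) ∨ (a%3 = 2 ∧ b%3 = 2)) := by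
    simp only [List.mem_cons, List.not_mem_nil, or_false, Prod.mk.injEq]
    omega
  by_cases hlen : b/3 < ((grid.getD (a/3) "").toList).length
  · rw [if_neg (by push_cast; omega)]
    by_cases h1 : ((grid.getD (a/3) "").toList).getD (b/3) ' ' = '/'
    · rw [if_pos h1, decide_eq_true_eq]
      have e3 : (b/3 < ((grid.getD (a/3) "").toList).length ∧ a/3 < grid.length ∧
          ((((grid.getD (a/3) "").toList).getD (b/3) ' ' = '/' ∧
              ((a%3 = 2 ∧ b%3 = 0) ∨ (a%3 = 1 ∧ b%3 = 1) ∨ (a%3 = 0 ∧ b%3 = 2))) ∨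
           (((grid.getD (a/3) "").toList).getD (b/3) ' ' = '\\' ∧
              ((a%3 = 0 ∧ b%3 = 0) ∨ (a%3 = 1 ∧ b%3 = 1) ∨ (a%3 = 2 ∧ b%3 = 2))))) ↔
          ((a%3 = 2 ∧ b%3 = 0) ∨ (a%3 = 1 ∧ b%3 = 1) ∨ (a%3 = 0 ∧ b%3 = 2)) := by
        constructor
        · rintro ⟨_, _, ⟨_, hoff⟩ | ⟨hbs, _⟩⟩
          · exact hoff
          · exact absurd (h1 ▸ hbs) (by decide)
        · intro hoff
          exact ⟨hlen, hglen, Or.inl ⟨h1, hoff⟩⟩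
      rw [e3]
      exact not_congr e1.symm
    · rw [if_neg h1]
      by_cases h2 : ((grid.getD (a/3) "").toList).getD (b/3) ' ' = '\\'
      · rw [if_pos h2, decide_eq_true_eq]
        have e3 : (b/3 < ((grid.getD (a/3) "").toList).length ∧ a/3 < grid.length ∧
            ((((grid.getD (a/3) "").toList).getD (b/3) ' ' = '/' ∧
                ((a%3 = 2 ∧ b%3 = 0) ∨ (a%3 = 1 ∧ b%3 = 1) ∨ (a%3 = 0 ∧ b%3 = 2))) ∨
             (((grid.getD (a/3) "").toList).getD (b/3) ' ' = '\\' ∧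
                ((a%3 = 0 ∧ b%3 = 0) ∨ (a%3 = 1 ∧ b%3 = 1) ∨ (a%3 = 2 ∧ b%3 = 2))))) ↔
            ((a%3 = 0 ∧ b%3 = 0) ∨ (a%3 = 1 ∧ b%3 = 1) ∨ (a%3 = 2 ∧ b%3 = 2)) := by
          constructor
          · rintro ⟨_, _, ⟨hbs, _⟩ | ⟨_, hoff⟩⟩
            · exact absurd hbs h1
            · exact hoff
          · intro hoff
            exact ⟨hlen, hglen, Or.inr ⟨h2, hoff⟩⟩
        rw [e3]
        exact not_congr e2.symm
      · rw [if_neg h2]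
        simp only [iff_true]
        rintro ⟨_, _, ⟨hbs, _⟩ | ⟨hbs, _⟩⟩
        · exact h1 hbs
        · exact h2 hbs
  · rw [if_pos (by push_cast; omega)]
    simp only [iff_true]
    rintro ⟨hbad, _, _⟩
    exact hlen hbad

-- ---- the row-major scan list and fold flattening ----
def pvIdx (m : Int) (p : Int × Int) : Int := p.1 * m + p.2

def pvScan (m : Int) : List (Int × Int) :=
  (PySem.List.pyRange 0 m 1).flatMap (fun i => (PySem.List.pyRange 0 m 1).map (fun j => (i, j)))

lemma pvScan_mem (m : Int) (p : Int × Int) : p ∈ pvScan m ↔ pvIn m p := by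
  unfold pvScan pvIn
  simp only [List.mem_flatMap, List.mem_map, PySem.List.mem_pyRange_one]
  constructor
  · rintro ⟨i, ⟨h1, h2⟩, j, ⟨h3, h4⟩, rfl⟩
    exact ⟨h1, h2, h3, h4⟩
  · rintro ⟨h1, h2, h3, h4⟩
    exact ⟨p.1, ⟨h1, h2⟩, p.2, ⟨h3, h4⟩, rfl⟩

lemma pvIdx_bounds {m : Int} {p : Int × Int} (h : pvIn m p) :
    0 ≤ pvIdx m p ∧ pvIdx m p < m * m := by
  obtain ⟨h1, h2, h3, h4⟩ := h
  unfold pvIdx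
  constructor
  · have := mul_nonneg h1 (le_trans h3 (le_of_lt h4))
    omega
  · have hstep : (p.1 + 1) * m ≤ m * m := by
      have := mul_le_mul_of_nonneg_right (by omega : p.1 + 1 ≤ m)
        (by omega : (0:Int) ≤ m)
      linarith
    nlinarith

lemma pvIdx_inj {m : Int} {p q : Int × Int} (hp : pvIn m p) (hq : pvIn m q)
    (h : pvIdx m p = pvIdx m q) : p = q := by
  obtain ⟨a1, a2, a3, a4⟩ := hp
  obtain ⟨b1, b2, b3, b4⟩ := hq
  unfold pvIdx at h
  have h1 : p.1 = q.1 := by nlinarith [sq_nonneg (p.1 - q.1)]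
  have h2 : p.2 = q.2 := by nlinarith
  exact Prod.ext h1 h2

lemma pvScan_pairwise_aux (m : Int) :
    ∀ l1 : List Int, l1.Pairwise (· < ·) →
      (l1.flatMap (fun i => (PySem.List.pyRange 0 m 1).map (fun j => (i, j)))).Pairwise
        (fun p q => pvIdx m p < pvIdx m q) := by
  intro l1
  induction l1 with
  | nil => intro _; simp
  | cons i l ih =>
    intro hpw
    rw [List.pairwise_cons] at hpw
    rw [List.flatMap_cons, List.pairwise_append]
    refine ⟨?_, ih hpw.2, ?_⟩
    · rw [List.pairwise_map]
      refine List.Pairwise.imp ?_ (PySem.List.pairwise_lt_pyRange_one (a := 0) (b := m))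
      intro a b hab
      unfold pvIdx
      simpa using hab
    · intro x hx y hy
      rw [List.mem_map] at hx
      obtain ⟨j, hj, rfl⟩ := hx
      rw [List.mem_flatMap] at hy
      obtain ⟨i', hi', hy⟩ := hy
      rw [List.mem_map] at hy
      obtain ⟨j', hj', rfl⟩ := hy
      have hii : i < i' := hpw.1 i' hi'
      rw [PySem.List.mem_pyRange_one] at hj hj'
      unfold pvIdx
      simp only
      nlinarith

lemma pvScan_pairwise (m : Int) :
    (pvScan m).Pairwise (fun p q => pvIdx m p < pvIdx m q) :=
  pvScan_pairwise_aux m _ (PySem.List.pairwise_lt_pyRange_one 0 m)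

lemma pvScan_nodup (m : Int) : (pvScan m).Nodup :=
  (pvScan_pairwise m).imp (fun h => by intro he; rw [he] at h; exact lt_irrefl _ h)

-- splitting the scan at the pixel being processed
lemma pvScan_split {m : Int} {P S2 : List (Int × Int)} {p : Int × Int}
    (hsp : pvScan m = P ++ p :: S2) :
    (∀ q ∈ P, pvIdx m q < pvIdx m p) ∧
    (∀ q, pvIn m q → pvIdx m q < pvIdx m p → q ∈ P) := by
  have hpw := pvScan_pairwise m
  rw [hsp, List.pairwise_append] at hpw
  obtain ⟨hP, hps, hcross⟩ := hpw
  constructor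
  · intro q hq
    exact hcross q hq p (by simp)
  · intro q hqin hlt
    have : q ∈ pvScan m := (pvScan_mem m q).mpr hqin
    rw [hsp, List.mem_append, List.mem_cons] at this
    rcases this with h | h | h
    · exact h
    · subst h; exact absurd hlt (lt_irrefl _)
    · rw [List.pairwise_cons] at hps
      exact absurd (hps.1 q h) (by omega)

-- a nested row/column double fold is the fold over the flattened scan list
lemma pvFoldl_nested_aux {β : Type} (m : Int) (f : β → Int × Int → β) :
    ∀ (l1 : List Int) (init : β),
      l1.foldl (fun st i =>
          (PySem.List.pyRange 0 m 1).foldl (fun st j => f st (i, j)) st) init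
        = (l1.flatMap (fun i => (PySem.List.pyRange 0 m 1).map (fun j => (i, j)))).foldl f init := by
  intro l1
  induction l1 with
  | nil => intro init; rfl
  | cons i l ih =>
    intro init
    rw [List.flatMap_cons, List.foldl_append, List.foldl_cons, List.foldl_map]
    exact ih _

lemma pvFoldl_nested {β : Type} (m : Int) (f : β → Int × Int → β) (init : β) :
    (PySem.List.pyRange 0 m 1).foldl (fun st i =>
        (PySem.List.pyRange 0 m 1).foldl (fun st j => f st (i, j)) st) init
      = (pvScan m).foldl f init :=
  pvFoldl_nested_aux m f _ init

-- a guarded fold becomes a fold over the filtered/mapped list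
lemma pvFoldl_guard {α β γ : Type} (G : α → Prop) [DecidablePred G] (e : α → γ)
    (h : β → γ → β) :
    ∀ (l : List α) (s : β),
      l.foldl (fun s x => if G x then h s (e x) else s) s
        = ((l.filter (fun x => decide (G x))).map e).foldl h s := by
  intro l
  induction l with
  | nil => intro s; rfl
  | cons a l ih =>
    intro s
    by_cases hg : G a
    · simp only [List.foldl_cons, if_pos hg, List.filter_cons,
        decide_eq_true hg]
      exact ih _
    · simp only [List.foldl_cons, if_neg hg, List.filter_cons,
        decide_eq_false hg, Bool.false_eq_true, if_false]
      exact ih _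

-- counting folds
lemma pvFoldl_countP {α : Type} (P : α → Prop) [DecidablePred P] :
    ∀ (l : List α) (init : Int),
      l.foldl (fun cnt x => if P x then cnt + 1 else cnt) init
        = init + (l.countP (fun x => decide (P x)) : Int) := by
  intro l
  induction l with
  | nil => intro init; simp
  | cons a l ih =>
    intro init
    by_cases h : P a
    · rw [List.foldl_cons, if_pos h, ih, List.countP_cons, if_pos (decide_eq_true h)]
      push_cast
      ring
    · rw [List.foldl_cons, if_neg h, ih, List.countP_cons,
        if_neg (by simp [decide_eq_false h])]
      simp

-- ---- A's outer loop counts the scan-order-first representative of each region ----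
-- FirstRep: a live pixel no earlier-scanned live pixel can reach
def pvFR (grid : List String) (m : Int) (p : Int × Int) : Prop :=
  pvIn m p ∧ pvLiveP grid p ∧
    ∀ q, pvIn m q → pvLiveP grid q → pvReach (pvLiveP grid) m q p → pvIdx m p ≤ pvIdx m q

noncomputable def pvFRb (grid : List String) (m : Int) (p : Int × Int) : Bool :=
  @decide (pvFR grid m p) (Classical.propDecidable _)

lemma pvAloop (grid : List String) :
    ∀ (S2 P : List (Int × Int)) (V : PySem.Set (Int × Int)) (c : Int),
      pvScan (3*(grid.length:Int)) = P ++ S2 →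
      (∀ x, x ∈ V ↔ ∃ q ∈ P, pvLiveP grid q ∧
          pvReach (pvLiveP grid) (3*(grid.length:Int)) q x) →
      c = ((P.countP (pvFRb grid (3*(grid.length:Int)))) : Int) →
      (S2.foldl (fun st (p : Int × Int) =>
          if pvGetCell (pvBuild grid) p.1 p.2 ≠ 0 then
            if p ∉ st.1 then
              (pvBFS (pvBuild grid) (3*(grid.length:Int)) (2 * (3*grid.length) * (3*grid.length) + 1)
                (PySem.Set.add st.1 p) [p], st.2 + 1)
            else st
          else st) (V, c)).2
        = (((pvScan (3*(grid.length:Int))).countP (pvFRb grid (3*(grid.length:Int)))) : Int) := by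
  intro S2
  induction S2 with
  | nil =>
    intro P V c hsp hV hc
    simp only [List.foldl_nil]
    rw [hc, hsp, List.append_nil]
  | cons p S2 ih =>
    intro P V c hsp hV hc
    have m := 3*(grid.length:Int)
    have hliveeq : ∀ x : Int × Int, pvIn (3*(grid.length:Int)) x →
        (pvLiveA (pvBuild grid) x ↔ pvLiveP grid x) := by
      intro x hx
      exact pvLive_iff grid x.1 x.2 hx.1 hx.2.1 hx.2.2.1 hx.2.2.2
    have hcong := pvAdj_congr (m := 3*(grid.length:Int)) hliveeq
    have hrcong := pvReach_congr (m := 3*(grid.length:Int)) hliveeq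
    have hpin : pvIn (3*(grid.length:Int)) p := by
      rw [← pvScan_mem]
      rw [hsp]
      simp
    obtain ⟨hPlt, hPmem⟩ := pvScan_split hsp
    have hmemP : ∀ q ∈ P, pvIn (3*(grid.length:Int)) q := by
      intro q hq
      rw [← pvScan_mem, hsp]
      simp [hq]
    have hsp' : pvScan (3*(grid.length:Int)) = (P ++ [p]) ++ S2 := by
      rw [hsp]; simp
    simp only [List.foldl_cons]
    by_cases hlp : pvLiveP grid p
    · have hcell : pvGetCell (pvBuild grid) p.1 p.2 ≠ 0 := (hliveeq p hpin).mpr hlp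
      rw [if_pos hcell]
      by_cases hv : p ∈ V
      · rw [if_neg (not_not_intro hv)]
        refine ih (P ++ [p]) V c hsp' ?_ ?_
        · intro x
          rw [hV x]
          constructor
          · rintro ⟨q, hq, hl, hr⟩
            exact ⟨q, by simp [hq], hl, hr⟩
          · rintro ⟨q, hq, hl, hr⟩
            rw [List.mem_append, List.mem_singleton] at hq
            rcases hq with hq | heq
            · exact ⟨q, hq, hl, hr⟩
            · obtain ⟨q0, hq0, hl0, hr0⟩ := (hV p).1 hv
              rw [heq] at hr
              exact ⟨q0, hq0, hl0, Relation.ReflTransGen.trans hr0 hr⟩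
        · rw [hc, List.countP_append]
          have hfr : pvFRb grid (3*(grid.length:Int)) p = false := by
            obtain ⟨q0, hq0, hl0, hr0⟩ := (hV p).1 hv
            unfold pvFRb
            refine @decide_eq_false _ (Classical.propDecidable _) ?_
            rintro ⟨-, -, hall⟩
            have := hall q0 (hmemP q0 hq0) hl0 hr0
            have := hPlt q0 hq0
            omega
          simp [hfr]
      · rw [if_pos hv]
        -- BFS preconditions (as in the flood-fill characterisation)
        have hmu : ∀ V' : List (Int × Int),
            pvMeas (3*(grid.length:Int)) V' [p] ≤ 2*(3*grid.length)*(3*grid.length)+1 := by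
          intro V'
          unfold pvMeas
          have h1 : (pvUnivFS (3*(grid.length:Int)) \ V'.toFinset).card
              ≤ (3*grid.length)*(3*grid.length) := by
            calc (pvUnivFS (3*(grid.length:Int)) \ V'.toFinset).card
                ≤ (pvUnivFS (3*(grid.length:Int))).card := Finset.card_le_card Finset.sdiff_subset
              _ = (3*grid.length)*(3*grid.length) := by
                  unfold pvUnivFS
                  have h : ((3*(grid.length:Int)) - 0).toNat = 3*grid.length := by omega
                  rw [Finset.card_product, Int.card_Ico, h]
          have h2 : 2*(3*grid.length)*(3*grid.length) = 2*((3*grid.length)*(3*grid.length)) := by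
            ring
          simp only [List.length_cons, List.length_nil]
          omega
        have hQA : ∀ x ∈ [p], x ∈ PySem.Set.add V p := by
          intro x hx
          simp only [List.mem_singleton] at hx
          subst hx
          exact (PySem.Set.mem_add _ _ _).mpr (Or.inr rfl)
        have hQgA : ∀ x ∈ [p], pvIn (3*(grid.length:Int)) x ∧ pvLiveA (pvBuild grid) x := by
          intro x hx
          simp only [List.mem_singleton] at hx
          rw [hx]
          exact ⟨hpin, (hliveeq p hpin).mpr hlp⟩
        have hVcl : pvClosed (pvLiveP grid) (3*(grid.length:Int)) V := by
          intro a ha y hadj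
          obtain ⟨q, hq, hl, hr⟩ := (hV a).1 ha
          exact (hV y).2 ⟨q, hq, hl, Relation.ReflTransGen.tail hr hadj⟩
        have hclA : ∀ a ∈ PySem.Set.add V p, a ∉ [p] →
            ∀ y, pvAdj (pvLiveA (pvBuild grid)) (3*(grid.length:Int)) a y →
              y ∈ PySem.Set.add V p := by
          intro a ha hnp y hadj
          have haV : a ∈ V := by
            rcases (PySem.Set.mem_add _ _ _).mp ha with h | h
            · exact h
            · exact absurd (by simp [h]) hnp
          exact (PySem.Set.mem_add _ _ _).mpr
            (Or.inl (hVcl a haV y ((hcong a y).1 hadj)))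
        obtain ⟨hBm, hBcl⟩ := pvBFS_char (pvBuild grid) (3*(grid.length:Int))
          (2*(3*grid.length)*(3*grid.length)+1) (PySem.Set.add V p) [p]
          (hmu _) hQA hQgA hclA
        refine ih (P ++ [p]) _ (c+1) hsp' ?_ ?_
        · intro x
          rw [hBm x]
          simp only [List.mem_singleton, exists_eq_left, PySem.Set.mem_add]
          rw [hV x, hrcong p x]
          constructor
          · rintro ((⟨q, hq, hl, hr⟩ | rfl) | hr)
            · exact ⟨q, by simp [hq], hl, hr⟩
            · exact ⟨x, by simp, hlp, Relation.ReflTransGen.refl⟩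
            · exact ⟨p, by simp, hlp, hr⟩
          · rintro ⟨q, hq, hl, hr⟩
            rw [List.mem_append, List.mem_singleton] at hq
            rcases hq with hq | rfl
            · exact Or.inl (Or.inl ⟨q, hq, hl, hr⟩)
            · exact Or.inr hr
        · rw [hc, List.countP_append]
          have hfr : pvFRb grid (3*(grid.length:Int)) p = true := by
            unfold pvFRb
            refine @decide_eq_true _ (Classical.propDecidable _) ⟨hpin, hlp, ?_⟩
            intro q hqin hql hqr
            by_contra hlt
            exact hv ((hV p).2 ⟨q, hPmem q hqin (by omega), hql, hqr⟩)
          simp [hfr]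
    · have hcell : ¬ (pvGetCell (pvBuild grid) p.1 p.2 ≠ 0) := by
        intro hA
        exact hlp ((hliveeq p hpin).mp hA)
      rw [if_neg hcell]
      refine ih (P ++ [p]) V c hsp' ?_ ?_
      · intro x
        rw [hV x]
        constructor
        · rintro ⟨q, hq, hl, hr⟩
          exact ⟨q, by simp [hq], hl, hr⟩
        · rintro ⟨q, hq, hl, hr⟩
          rw [List.mem_append, List.mem_singleton] at hq
          rcases hq with hq | rfl
          · exact ⟨q, hq, hl, hr⟩
          · exact absurd hl hlp
      · rw [hc, List.countP_append]
        have hfr : pvFRb grid (3*(grid.length:Int)) p = false := by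
          unfold pvFRb
          refine @decide_eq_false _ (Classical.propDecidable _) ?_
          rintro ⟨-, hl, -⟩
          exact hlp hl
        simp [hfr]

-- A's result is the number of FirstReps
lemma pvA_count (grid : List String) :
    regionsBySlashes grid
      = (((pvScan (3*(grid.length:Int))).countP (pvFRb grid (3*(grid.length:Int)))) : Int) := by
  have hflat := pvFoldl_nested (3*(grid.length:Int))
    (fun st (p : Int × Int) =>
      if pvGetCell (pvBuild grid) p.1 p.2 ≠ 0 then
        if p ∉ st.1 then
          (pvBFS (pvBuild grid) (3*(grid.length:Int)) (2 * (3*grid.length) * (3*grid.length) + 1)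
            (PySem.Set.add st.1 p) [p], st.2 + 1)
        else st
      else st) ((PySem.Set.empty : PySem.Set (Int × Int)), (0 : Int))
  have h1 : regionsBySlashes grid
      = ((pvScan (3*(grid.length:Int))).foldl
          (fun st (p : Int × Int) =>
            if pvGetCell (pvBuild grid) p.1 p.2 ≠ 0 then
              if p ∉ st.1 then
                (pvBFS (pvBuild grid) (3*(grid.length:Int))
                  (2 * (3*grid.length) * (3*grid.length) + 1)
                  (PySem.Set.add st.1 p) [p], st.2 + 1)
              else st
            else st) ((PySem.Set.empty : PySem.Set (Int × Int)), (0 : Int))).2 :=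
    congrArg Prod.snd hflat
  rw [h1]
  exact pvAloop grid (pvScan (3*(grid.length:Int))) [] PySem.Set.empty 0
    (by simp) (fun x => by simp [PySem.Set.empty]) (by simp)

-- ---- union-find: find, roots, and the processed-edge equivalence ----
def pvPar (parent : List Int) (x : Int) : Int := PySem.List.pyGetD parent x 0

-- parents never increase and stay nonnegative (holds throughout B's run)
def pvGood (parent : List Int) : Prop :=
  ∀ x : Int, 0 ≤ x → x < (parent.length : Int) →
    0 ≤ pvPar parent x ∧ pvPar parent x ≤ x

lemma pvPar_lt_of_ne {parent : List Int} (hg : pvGood parent) {x : Int}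
    (h0 : 0 ≤ x) (hN : x < (parent.length : Int)) (hne : pvPar parent x ≠ x) :
    0 ≤ pvPar parent x ∧ pvPar parent x < x := by
  have := hg x h0 hN
  omega

lemma pvFindF_stable {parent : List Int} (hg : pvGood parent) :
    ∀ (t : Nat) (x : Int), 0 ≤ x → x < (parent.length : Int) → x.toNat ≤ t →
      ∀ f g : Nat, x.toNat < f → x.toNat < g →
        pvFindF parent f x = pvFindF parent g x := by
  intro t
  induction t with
  | zero =>
    intro x h0 hN ht f g hf hg'
    obtain ⟨f, rfl⟩ : ∃ f', f = f' + 1 := ⟨f - 1, by omega⟩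
    obtain ⟨g, rfl⟩ : ∃ g', g = g' + 1 := ⟨g - 1, by omega⟩
    simp only [pvFindF]
    by_cases hr : PySem.List.pyGetD parent x 0 = x
    · rw [if_pos hr, if_pos hr]
    · have := pvPar_lt_of_ne hg h0 hN hr
      unfold pvPar at this
      omega
  | succ t ih =>
    intro x h0 hN ht f g hf hg'
    obtain ⟨f, rfl⟩ : ∃ f', f = f' + 1 := ⟨f - 1, by omega⟩
    obtain ⟨g, rfl⟩ : ∃ g', g = g' + 1 := ⟨g - 1, by omega⟩
    simp only [pvFindF]
    by_cases hr : PySem.List.pyGetD parent x 0 = x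
    · rw [if_pos hr, if_pos hr]
    · rw [if_neg hr, if_neg hr]
      have hlt := pvPar_lt_of_ne hg h0 hN hr
      exact ih (pvPar parent x) hlt.1 (by omega) (by omega) f g (by omega) (by omega)

lemma pvFind_unfold {parent : List Int} (hg : pvGood parent) {x : Int}
    (h0 : 0 ≤ x) (hN : x < (parent.length : Int)) :
    pvFind parent x =
      if pvPar parent x = x then x else pvFind parent (pvPar parent x) := by
  unfold pvFind pvPar
  have hlen : x.toNat < parent.length := by omega
  by_cases hr : PySem.List.pyGetD parent x 0 = x
  · rw [if_pos hr]
    obtain ⟨f, hf⟩ : ∃ f', parent.length = f' + 1 := ⟨parent.length - 1, by omega⟩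
    rw [hf]
    simp only [pvFindF]
    rw [if_pos hr]
  · rw [if_neg hr]
    have hlt := pvPar_lt_of_ne hg h0 hN hr
    simp only [pvPar] at hlt
    have h1 : pvFindF parent parent.length x = pvFindF parent (x.toNat + 1) x :=
      pvFindF_stable hg x.toNat x h0 hN (le_refl _) _ _ hlen (by omega)
    rw [h1]
    simp only [pvFindF]
    rw [if_neg hr]
    exact pvFindF_stable hg (PySem.List.pyGetD parent x 0).toNat _ hlt.1 (by omega)
      (le_refl _) _ _ (by omega) (by omega)

lemma pvFind_le {parent : List Int} (hg : pvGood parent) :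
    ∀ (t : Nat) (x : Int), 0 ≤ x → x < (parent.length : Int) → x.toNat ≤ t →
      0 ≤ pvFind parent x ∧ pvFind parent x ≤ x := by
  intro t
  induction t with
  | zero =>
    intro x h0 hN ht
    rw [pvFind_unfold hg h0 hN]
    by_cases hr : pvPar parent x = x
    · rw [if_pos hr]; omega
    · have := pvPar_lt_of_ne hg h0 hN hr
      omega
  | succ t ih =>
    intro x h0 hN ht
    rw [pvFind_unfold hg h0 hN]
    by_cases hr : pvPar parent x = x
    · rw [if_pos hr]; omega
    · rw [if_neg hr]
      have hlt := pvPar_lt_of_ne hg h0 hN hr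
      have := ih (pvPar parent x) hlt.1 (by omega) (by omega)
      omega

lemma pvFind_root {parent : List Int} (hg : pvGood parent) :
    ∀ (t : Nat) (x : Int), 0 ≤ x → x < (parent.length : Int) → x.toNat ≤ t →
      pvPar parent (pvFind parent x) = pvFind parent x := by
  intro t
  induction t with
  | zero =>
    intro x h0 hN ht
    rw [pvFind_unfold hg h0 hN]
    by_cases hr : pvPar parent x = x
    · rw [if_pos hr]; exact hr
    · have := pvPar_lt_of_ne hg h0 hN hr
      omega
  | succ t ih =>
    intro x h0 hN ht
    rw [pvFind_unfold hg h0 hN]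
    by_cases hr : pvPar parent x = x
    · rw [if_pos hr]; exact hr
    · rw [if_neg hr]
      have hlt := pvPar_lt_of_ne hg h0 hN hr
      exact ih (pvPar parent x) hlt.1 (by omega) (by omega)

lemma pvFind_fix {parent : List Int} (hg : pvGood parent) {x : Int}
    (h0 : 0 ≤ x) (hN : x < (parent.length : Int)) (hr : pvPar parent x = x) :
    pvFind parent x = x := by
  rw [pvFind_unfold hg h0 hN, if_pos hr]

-- the equivalence generated by a list of processed edges
def pvER (E : List (Int × Int)) : Int → Int → Prop :=
  Relation.EqvGen (fun a b => (a, b) ∈ E)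

lemma pvER_mono {E E' : List (Int × Int)} (h : ∀ e ∈ E, e ∈ E') {x y : Int}
    (hxy : pvER E x y) : pvER E' x y := by
  induction hxy with
  | rel a b hab => exact Relation.EqvGen.rel a b (h _ hab)
  | refl a => exact Relation.EqvGen.refl a
  | symm a b _ ih => exact Relation.EqvGen.symm a b ih
  | trans a b c _ _ ih1 ih2 => exact Relation.EqvGen.trans a b c ih1 ih2

-- full union-find invariant over the processed edge list
def pvInv (parent : List Int) (E : List (Int × Int)) : Prop :=
  pvGood parent ∧
  (∀ x : Int, 0 ≤ x → x < (parent.length : Int) → pvER E x (pvPar parent x)) ∧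
  (∀ e ∈ E, pvFind parent e.1 = pvFind parent e.2) ∧
  (∀ e ∈ E, 0 ≤ e.1 ∧ e.1 < (parent.length : Int) ∧ 0 ≤ e.2 ∧ e.2 < (parent.length : Int))

lemma pvFind_ER {parent : List Int} {E : List (Int × Int)}
    (hg : pvGood parent)
    (h2 : ∀ x : Int, 0 ≤ x → x < (parent.length : Int) → pvER E x (pvPar parent x)) :
    ∀ (t : Nat) (x : Int), 0 ≤ x → x < (parent.length : Int) → x.toNat ≤ t →
      pvER E x (pvFind parent x) := by
  intro t
  induction t with
  | zero =>
    intro x h0 hN ht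
    rw [pvFind_unfold hg h0 hN]
    by_cases hr : pvPar parent x = x
    · rw [if_pos hr]; exact Relation.EqvGen.refl x
    · have := pvPar_lt_of_ne hg h0 hN hr
      omega
  | succ t ih =>
    intro x h0 hN ht
    rw [pvFind_unfold hg h0 hN]
    by_cases hr : pvPar parent x = x
    · rw [if_pos hr]; exact Relation.EqvGen.refl x
    · rw [if_neg hr]
      have hlt := pvPar_lt_of_ne hg h0 hN hr
      exact Relation.EqvGen.trans _ _ _ (h2 x h0 hN)
        (ih (pvPar parent x) hlt.1 (by omega) (by omega))

lemma pvER_find {parent : List Int} {E : List (Int × Int)}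
    (h3 : ∀ e ∈ E, pvFind parent e.1 = pvFind parent e.2) {x y : Int}
    (hxy : pvER E x y) : pvFind parent x = pvFind parent y := by
  induction hxy with
  | rel a b hab => exact h3 (a, b) hab
  | refl a => rfl
  | symm a b _ ih => exact ih.symm
  | trans a b c _ _ ih1 ih2 => exact ih1.trans ih2

lemma pvFind_iff_ER {parent : List Int} {E : List (Int × Int)} (hinv : pvInv parent E)
    {x y : Int} (hx0 : 0 ≤ x) (hxN : x < (parent.length : Int))
    (hy0 : 0 ≤ y) (hyN : y < (parent.length : Int)) :
    pvFind parent x = pvFind parent y ↔ pvER E x y := by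
  obtain ⟨hg, h2, h3, h4⟩ := hinv
  constructor
  · intro hf
    refine Relation.EqvGen.trans _ _ _ (pvFind_ER hg h2 x.toNat x hx0 hxN (le_refl _)) ?_
    rw [hf]
    exact Relation.EqvGen.symm _ _ (pvFind_ER hg h2 y.toNat y hy0 hyN (le_refl _))
  · exact pvER_find h3

-- writing parent[M] := mo (mo, M the two distinct roots, mo < M)
lemma pvPar_set {parent : List Int} {M mo : Int} (hM0 : 0 ≤ M)
    (hMN : M < (parent.length : Int)) (x : Int) (hx0 : 0 ≤ x) :
    pvPar (PySem.List.pySetD parent M mo) x = if x = M then mo else pvPar parent x := by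
  unfold pvPar
  rw [PySem.List.pySetD_of_nonneg _ _ hM0]
  have hx : (x.toNat : Int) = x := Int.toNat_of_nonneg hx0
  have hM : (M.toNat : Int) = M := Int.toNat_of_nonneg hM0
  rw [← hx, ← hM, PySem.List.pyGetD_natCast, PySem.List.pyGetD_natCast, pvGetD_set]
  by_cases he : x.toNat = M.toNat
  · have : x = M := by omega
    rw [if_pos ⟨he.symm, by omega⟩, if_pos (by omega)]
  · rw [if_neg (by omega), if_neg (by omega)]

lemma pvLength_pySetD (parent : List Int) (M mo : Int) :
    (PySem.List.pySetD parent M mo).length = parent.length := by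
  unfold PySem.List.pySetD
  cases h : PySem.List.pySet? parent M mo with
  | none => simp
  | some l =>
    simp only [Option.getD_some]
    unfold PySem.List.pySet? at h
    rw [Option.map_eq_some_iff] at h
    obtain ⟨k, -, hk⟩ := h
    rw [← hk]
    simp

lemma pvGood_set {parent : List Int} (hg : pvGood parent) {M mo : Int}
    (h0 : 0 ≤ mo) (hlt : mo < M) (hMN : M < (parent.length : Int)) :
    pvGood (PySem.List.pySetD parent M mo) := by
  intro x hx0 hxN
  rw [pvLength_pySetD] at hxN
  rw [pvPar_set (by omega) hMN x hx0]
  by_cases he : x = M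
  · rw [if_pos he]; omega
  · rw [if_neg he]; exact hg x hx0 hxN

lemma pvFind_set {parent : List Int} (hg : pvGood parent) {M mo : Int}
    (h0 : 0 ≤ mo) (hlt : mo < M) (hMN : M < (parent.length : Int))
    (hMroot : pvPar parent M = M) (hmoroot : pvPar parent mo = mo) :
    ∀ (t : Nat) (x : Int), 0 ≤ x → x < (parent.length : Int) → x.toNat ≤ t →
      pvFind (PySem.List.pySetD parent M mo) x =
        if pvFind parent x = M then mo else pvFind parent x := by
  have hg' : pvGood (PySem.List.pySetD parent M mo) := pvGood_set hg h0 hlt hMN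
  have hlen : ((PySem.List.pySetD parent M mo).length : Int) = (parent.length : Int) := by
    rw [pvLength_pySetD]
  intro t
  induction t with
  | zero =>
    intro x hx0 hxN ht
    have hxz : x = 0 := by omega
    subst hxz
    rw [pvFind_unfold hg' (by omega) (by omega), pvPar_set (by omega) hMN 0 (by omega)]
    by_cases he : (0:Int) = M
    · omega
    · rw [if_neg he]
      by_cases hr : pvPar parent 0 = 0
      · rw [if_pos hr, pvFind_fix hg (by omega) (by omega) hr, if_neg (by omega)]
      · have := pvPar_lt_of_ne hg (by omega) (by omega) hr
        omega
  | succ t ih =>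
    intro x hx0 hxN ht
    rw [pvFind_unfold hg' (by omega) (by omega), pvPar_set (by omega) hMN x hx0]
    by_cases he : x = M
    · rw [if_pos he, if_neg (by omega)]
      have hmo : pvFind (PySem.List.pySetD parent M mo) mo = mo := by
        refine pvFind_fix hg' h0 (by omega) ?_
        rw [pvPar_set (by omega) hMN mo h0, if_neg (by omega)]
        exact hmoroot
      rw [hmo]
      have hfM : pvFind parent x = M := by
        rw [he]
        exact pvFind_fix hg (by omega) hMN hMroot
      rw [if_pos hfM]
    · rw [if_neg he]
      by_cases hr : pvPar parent x = x
      · rw [if_pos hr, pvFind_fix hg hx0 hxN hr, if_neg he]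
      · rw [if_neg hr]
        have hplt := pvPar_lt_of_ne hg hx0 hxN hr
        rw [ih (pvPar parent x) hplt.1 (by omega) (by omega)]
        rw [pvFind_unfold hg hx0 hxN, if_neg hr]

lemma pvUCore_eq {parent : List Int} {a b : Int}
    (hne : pvFind parent a ≠ pvFind parent b) :
    pvUCore parent a b =
      PySem.List.pySetD parent (max (pvFind parent a) (pvFind parent b))
        (min (pvFind parent a) (pvFind parent b)) := by
  unfold pvUCore
  rw [if_pos hne]
  rcases lt_trichotomy (pvFind parent a) (pvFind parent b) with h | h | h
  · rw [if_pos h, max_eq_right (le_of_lt h), min_eq_left (le_of_lt h)]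
  · exact absurd h hne
  · rw [if_neg (by omega), max_eq_left (le_of_lt h), min_eq_right (le_of_lt h)]

lemma pvInv_ucore {parent : List Int} {E : List (Int × Int)} (hinv : pvInv parent E)
    {a b : Int} (ha0 : 0 ≤ a) (haN : a < (parent.length : Int))
    (hb0 : 0 ≤ b) (hbN : b < (parent.length : Int)) :
    pvInv (pvUCore parent a b) (E ++ [(a, b)]) ∧
      (pvUCore parent a b).length = parent.length := by
  obtain ⟨hg, h2, h3, h4⟩ := hinv
  have hra := pvFind_le hg a.toNat a ha0 haN (le_refl _)
  have hrb := pvFind_le hg b.toNat b hb0 hbN (le_refl _)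
  have hroota := pvFind_root hg a.toNat a ha0 haN (le_refl _)
  have hrootb := pvFind_root hg b.toNat b hb0 hbN (le_refl _)
  by_cases hne : pvFind parent a = pvFind parent b
  · have hsame : pvUCore parent a b = parent := by
      unfold pvUCore
      rw [if_neg (not_not_intro hne)]
    rw [hsame]
    refine ⟨⟨hg, ?_, ?_, ?_⟩, rfl⟩
    · intro x hx0 hxN
      exact pvER_mono (fun e he => by simp [he]) (h2 x hx0 hxN)
    · intro e he
      rw [List.mem_append, List.mem_singleton] at he
      rcases he with he | he
      · exact h3 e he
      · rw [he]; exact hne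
    · intro e he
      rw [List.mem_append, List.mem_singleton] at he
      rcases he with he | he
      · exact h4 e he
      · rw [he]; exact ⟨ha0, haN, hb0, hbN⟩
  · set ra := pvFind parent a with hra_def
    set rb := pvFind parent b with hrb_def
    set M := max ra rb with hM_def
    set mo := min ra rb with hmo_def
    have hmoM : mo < M := by
      rcases lt_trichotomy ra rb with h | h | h
      · rw [hM_def, hmo_def, max_eq_right (le_of_lt h), min_eq_left (le_of_lt h)]; exact h
      · exact absurd h hne
      · rw [hM_def, hmo_def, max_eq_left (le_of_lt h), min_eq_right (le_of_lt h)]; exact h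
    have hmo0 : 0 ≤ mo := by rw [hmo_def]; omega
    have hMN : M < (parent.length : Int) := by rw [hM_def]; omega
    have hMroot : pvPar parent M = M := by
      rcases max_choice ra rb with h | h <;> rw [hM_def, h]
      · exact hroota
      · exact hrootb
    have hmoroot : pvPar parent mo = mo := by
      rcases min_choice ra rb with h | h <;> rw [hmo_def, h]
      · exact hroota
      · exact hrootb
    have huc : pvUCore parent a b = PySem.List.pySetD parent M mo := pvUCore_eq hne
    have hchar : ∀ x : Int, 0 ≤ x → x < (parent.length : Int) →
        pvFind (pvUCore parent a b) x =
          if pvFind parent x = M then mo else pvFind parent x := by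
      intro x hx0 hxN
      rw [huc]
      exact pvFind_set hg hmo0 hmoM hMN hMroot hmoroot x.toNat x hx0 hxN (le_refl _)
    have hlen : (pvUCore parent a b).length = parent.length := by
      rw [huc, pvLength_pySetD]
    refine ⟨⟨?_, ?_, ?_, ?_⟩, hlen⟩
    · rw [huc]; exact pvGood_set hg hmo0 hmoM hMN
    · intro x hx0 hxN
      rw [hlen] at hxN
      rw [huc, pvPar_set (by omega) hMN x hx0]
      have hmono : ∀ {u v : Int}, pvER E u v → pvER (E ++ [(a, b)]) u v :=
        fun h => pvER_mono (fun e he => by simp [he]) h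
      by_cases he : x = M
      · rw [if_pos he]
        have hEa : pvER (E ++ [(a, b)]) a ra :=
          hmono (pvFind_ER hg h2 a.toNat a ha0 haN (le_refl _))
        have hEb : pvER (E ++ [(a, b)]) b rb :=
          hmono (pvFind_ER hg h2 b.toNat b hb0 hbN (le_refl _))
        have hab : pvER (E ++ [(a, b)]) a b :=
          Relation.EqvGen.rel a b (by simp)
        have hrarb : pvER (E ++ [(a, b)]) ra rb :=
          Relation.EqvGen.trans _ _ _ (Relation.EqvGen.symm _ _ hEa)
            (Relation.EqvGen.trans _ _ _ hab hEb)
        rw [he]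
        rcases max_choice ra rb with hMc | hMc <;> rcases min_choice ra rb with hmc | hmc <;>
          rw [hM_def, hmo_def, hMc, hmc]
        · exact Relation.EqvGen.refl ra
        · exact hrarb
        · exact Relation.EqvGen.symm _ _ hrarb
        · exact Relation.EqvGen.refl rb
      · rw [if_neg he]
        exact hmono (h2 x hx0 hxN)
    · intro e he
      rw [List.mem_append, List.mem_singleton] at he
      rcases he with he | he
      · have hbnds := h4 e he
        rw [hchar e.1 hbnds.1 hbnds.2.1, hchar e.2 hbnds.2.2.1 hbnds.2.2.2, h3 e he]
      · rw [he]
        simp only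
        rw [hchar a ha0 haN, hchar b hb0 hbN]
        have hM' : M = ra ∨ M = rb := by
          rcases max_choice ra rb with h | h
          · exact Or.inl (hM_def.trans h)
          · exact Or.inr (hM_def.trans h)
        have hmo' : mo = ra ∨ mo = rb := by
          rcases min_choice ra rb with h | h
          · exact Or.inl (hmo_def.trans h)
          · exact Or.inr (hmo_def.trans h)
        by_cases hraM : ra = M
        · rw [if_pos hraM, if_neg (by omega)]
          omega
        · rw [if_neg hraM]
          have hrbM : rb = M := by omega
          rw [if_pos hrbM]
          omega
    · intro e he
      rw [List.mem_append, List.mem_singleton] at he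
      rw [hlen]
      rcases he with he | he
      · exact h4 e he
      · rw [he]; exact ⟨ha0, haN, hb0, hbN⟩

lemma pvInv_fold :
    ∀ (L : List (Int × Int)) (parent : List Int) (E : List (Int × Int)),
      pvInv parent E →
      (∀ e ∈ L, 0 ≤ e.1 ∧ e.1 < (parent.length : Int) ∧
        0 ≤ e.2 ∧ e.2 < (parent.length : Int)) →
      pvInv (L.foldl (fun par e => pvUCore par e.1 e.2) parent) (E ++ L) ∧
        (L.foldl (fun par e => pvUCore par e.1 e.2) parent).length = parent.length := by
  intro L
  induction L with
  | nil =>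
    intro parent E hinv hb
    simpa using hinv
  | cons e L ih =>
    intro parent E hinv hb
    have he := hb e (by simp)
    obtain ⟨hinv', hlen'⟩ := pvInv_ucore hinv he.1 he.2.1 he.2.2.1 he.2.2.2
    have hb' : ∀ e' ∈ L, 0 ≤ e'.1 ∧ e'.1 < ((pvUCore parent e.1 e.2).length : Int) ∧
        0 ≤ e'.2 ∧ e'.2 < ((pvUCore parent e.1 e.2).length : Int) := by
      intro e' he'
      rw [hlen']
      exact hb e' (by simp [he'])
    obtain ⟨hi, hl⟩ := ih (pvUCore parent e.1 e.2) (E ++ [(e.1, e.2)]) hinv' hb'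
    constructor
    · simpa using hi
    · simp only [List.foldl_cons]
      rw [hl, hlen']

-- ---- B's union loop processes exactly this edge list ----
def pvEdges (grid : List String) (m : Int) : List (Int × Int) :=
  (pvScan m).flatMap (fun p =>
    if pvLiveB grid p.1 p.2 = true then
      (([((p.1 - 1, p.2) : Int × Int), (p.1, p.2 - 1)].filter
          (fun q => decide (0 ≤ q.1 ∧ 0 ≤ q.2 ∧ pvLiveB grid q.1 q.2 = true))).map
        (fun q => (p.1 * m + p.2, q.1 * m + q.2)))
    else [])

def pvParentF (grid : List String) (m : Int) : List Int :=
  (pvEdges grid m).foldl (fun par e => pvUCore par e.1 e.2)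
    (PySem.List.pyRange 0 (m * m) 1)

def pvUnionFold (grid : List String) (m : Int) : List Int :=
  (PySem.List.pyRange 0 m 1).foldl (fun par r =>
    (PySem.List.pyRange 0 m 1).foldl (fun par c =>
      if pvLiveB grid r c = true then
        [((r - 1, c) : Int × Int), (r, c - 1)].foldl
          (fun par q => pvUStep grid m par r c q) par
      else par) par) (PySem.List.pyRange 0 (m * m) 1)

def pvCntFold (grid : List String) (m : Int) (par : List Int) : Int :=
  (PySem.List.pyRange 0 m 1).foldl (fun cnt r =>
    (PySem.List.pyRange 0 m 1).foldl (fun cnt c =>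
      if pvLiveB grid r c = true ∧ PySem.List.pyGetD par (r * m + c) 0 = r * m + c then
        cnt + 1
      else cnt) cnt) 0

lemma pvFoldl_flatMap {α β γ : Type} (g : α → List γ) (h : β → γ → β) :
    ∀ (l : List α) (s : β),
      (l.flatMap g).foldl h s = l.foldl (fun s a => (g a).foldl h s) s := by
  intro l
  induction l with
  | nil => intro s; rfl
  | cons a l ih =>
    intro s
    rw [List.flatMap_cons, List.foldl_append, List.foldl_cons]
    exact ih _

lemma pvUnionFold_eq (grid : List String) (m : Int) :
    pvUnionFold grid m = pvParentF grid m := by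
  unfold pvUnionFold
  rw [pvFoldl_nested m
    (fun par (p : Int × Int) =>
      if pvLiveB grid p.1 p.2 = true then
        [((p.1 - 1, p.2) : Int × Int), (p.1, p.2 - 1)].foldl
          (fun par q => pvUStep grid m par p.1 p.2 q) par
      else par) (PySem.List.pyRange 0 (m * m) 1)]
  unfold pvParentF pvEdges
  rw [pvFoldl_flatMap]
  refine List.foldl_ext _ _ _ ?_
  intro par p _
  by_cases hlp : pvLiveB grid p.1 p.2 = true
  · rw [if_pos hlp, if_pos hlp]
    exact pvFoldl_guard
      (fun q : Int × Int => 0 ≤ q.1 ∧ 0 ≤ q.2 ∧ pvLiveB grid q.1 q.2 = true)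
      (fun q : Int × Int => (p.1 * m + p.2, q.1 * m + q.2))
      (fun par e => pvUCore par e.1 e.2) _ par
  · rw [if_neg hlp, if_neg hlp]
    rfl

-- B's result is the number of live root pixels of the final forest
lemma pvB_count (grid : List String) :
    regionsBySlashes_alt grid
      = (((pvScan (3*(grid.length:Int))).countP (fun p =>
          decide (pvLiveB grid p.1 p.2 = true ∧
            pvPar (pvParentF grid (3*(grid.length:Int))) (pvIdx (3*(grid.length:Int)) p)
              = pvIdx (3*(grid.length:Int)) p))) : Int) := by
  have h1 : regionsBySlashes_alt grid
      = pvCntFold grid (3*(grid.length:Int)) (pvUnionFold grid (3*(grid.length:Int))) := rfl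
  rw [h1, pvUnionFold_eq]
  unfold pvCntFold
  rw [pvFoldl_nested (3*(grid.length:Int))
    (fun cnt (p : Int × Int) =>
      if pvLiveB grid p.1 p.2 = true ∧
          PySem.List.pyGetD (pvParentF grid (3*(grid.length:Int)))
            (p.1 * (3*(grid.length:Int)) + p.2) 0 = p.1 * (3*(grid.length:Int)) + p.2 then
        cnt + 1
      else cnt) 0]
  rw [pvFoldl_countP
    (fun p : Int × Int => pvLiveB grid p.1 p.2 = true ∧
      PySem.List.pyGetD (pvParentF grid (3*(grid.length:Int)))
        (p.1 * (3*(grid.length:Int)) + p.2) 0 = p.1 * (3*(grid.length:Int)) + p.2)]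
  rw [zero_add]
  rfl

-- ---- the initial forest and the final invariant ----
lemma pvParent0_len {m : Int} (hm : 0 ≤ m) :
    ((PySem.List.pyRange 0 (m * m) 1).length : Int) = m * m := by
  rw [PySem.List.length_pyRange_one]
  have : 0 ≤ m * m := mul_nonneg hm hm
  omega

lemma pvParent0_par {m : Int} (x : Int) (h0 : 0 ≤ x) (hN : x < m * m) :
    pvPar (PySem.List.pyRange 0 (m * m) 1) x = x := by
  unfold pvPar
  have hlen : x.toNat < (PySem.List.pyRange 0 (m * m) 1).length := by
    rw [PySem.List.length_pyRange_one]
    omega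
  rw [PySem.List.pyGetD_eq_getElem _ _ h0 (by
    rw [PySem.List.length_pyRange_one]
    omega)]
  rw [PySem.List.getElem_pyRange_one]
  omega

lemma pvEdges_mem (grid : List String) (m : Int) (x y : Int) :
    (x, y) ∈ pvEdges grid m ↔
      ∃ p q : Int × Int, pvIn m p ∧ pvLiveP grid p ∧ pvIn m q ∧ pvLiveP grid q ∧
        x = pvIdx m p ∧ y = pvIdx m q ∧
        (q = (p.1 - 1, p.2) ∨ q = (p.1, p.2 - 1)) := by
  unfold pvEdges
  rw [List.mem_flatMap]
  constructor
  · rintro ⟨p, hp, hmem⟩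
    rw [pvScan_mem] at hp
    by_cases hlp : pvLiveB grid p.1 p.2 = true
    · rw [if_pos hlp] at hmem
      rw [List.mem_map] at hmem
      obtain ⟨q, hq, heq⟩ := hmem
      rw [List.mem_filter] at hq
      obtain ⟨hqmem, hguard⟩ := hq
      rw [decide_eq_true_iff] at hguard
      have hqin : pvIn m q := by
        simp only [List.mem_cons, List.not_mem_nil, or_false] at hqmem
        obtain ⟨h1, h2, h3, h4⟩ := hp
        rcases hqmem with rfl | rfl
        · exact ⟨hguard.1, by simpa using (by omega : p.1 - 1 < m), hguard.2.1, by simpa using h4⟩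
        · exact ⟨hguard.1, by simpa using h2, hguard.2.1, by simpa using (by omega : p.2 - 1 < m)⟩
      refine ⟨p, q, hp, hlp, hqin, hguard.2.2, ?_, ?_, ?_⟩
      · exact (congrArg Prod.fst heq).symm
      · exact (congrArg Prod.snd heq).symm
      · simpa using hqmem
    · rw [if_neg hlp] at hmem
      simp at hmem
  · rintro ⟨p, q, hp, hlp, hq, hlq, hx, hy, hdir⟩
    have hlp' : pvLiveB grid p.1 p.2 = true := hlp
    refine ⟨p, (pvScan_mem m p).mpr hp, ?_⟩
    rw [if_pos hlp', List.mem_map]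
    refine ⟨q, ?_, ?_⟩
    · rw [List.mem_filter]
      constructor
      · simpa using hdir
      · rw [decide_eq_true_iff]
        exact ⟨hq.1, hq.2.2.1, hlq⟩
    · rw [hx, hy]
      rfl
  
lemma pvEdges_bounds (grid : List String) (m : Int) :
    ∀ e ∈ pvEdges grid m, 0 ≤ e.1 ∧ e.1 < m * m ∧ 0 ≤ e.2 ∧ e.2 < m * m := by
  intro e he
  obtain ⟨p, q, hp, -, hq, -, hx, hy, -⟩ := (pvEdges_mem grid m e.1 e.2).mp (by
    rw [show ((e.1, e.2) : Int × Int) = e from rfl]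
    exact he)
  have h1 := pvIdx_bounds hp
  have h2 := pvIdx_bounds hq
  rw [hx, hy]
  exact ⟨h1.1, h1.2, h2.1, h2.2⟩

lemma pvParentF_inv (grid : List String) {m : Int} (hm : 0 ≤ m) :
    pvInv (pvParentF grid m) (pvEdges grid m) ∧
      ((pvParentF grid m).length : Int) = m * m := by
  have hlen0 := pvParent0_len (m := m) hm
  have hinv0 : pvInv (PySem.List.pyRange 0 (m * m) 1) [] := by
    refine ⟨?_, ?_, ?_, ?_⟩
    · intro x h0 hN
      rw [hlen0] at hN
      rw [pvParent0_par x h0 hN]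
      omega
    · intro x h0 hN
      rw [hlen0] at hN
      rw [pvParent0_par x h0 hN]
      exact Relation.EqvGen.refl x
    · intro e he; simp at he
    · intro e he; simp at he
  have hb : ∀ e ∈ pvEdges grid m,
      0 ≤ e.1 ∧ e.1 < ((PySem.List.pyRange 0 (m * m) 1).length : Int) ∧
      0 ≤ e.2 ∧ e.2 < ((PySem.List.pyRange 0 (m * m) 1).length : Int) := by
    intro e he
    rw [hlen0]
    exact pvEdges_bounds grid m e he
  obtain ⟨hi, hl⟩ := pvInv_fold (pvEdges grid m) (PySem.List.pyRange 0 (m * m) 1) [] hinv0 hb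
  refine ⟨by simpa using hi, ?_⟩
  unfold pvParentF
  rw [hl, hlen0]

-- ---- the processed-edge equivalence is pixel reachability ----
lemma pvAdj_edge {grid : List String} {m : Int} {p q : Int × Int}
    (h : pvAdj (pvLiveP grid) m p q) :
    (pvIdx m p, pvIdx m q) ∈ pvEdges grid m ∨ (pvIdx m q, pvIdx m p) ∈ pvEdges grid m := by
  obtain ⟨hp, hq, lp, lq, hd⟩ := h
  rcases hd with hD | hD | hD | hD
  · exact Or.inl ((pvEdges_mem grid m _ _).mpr
      ⟨p, q, hp, lp, hq, lq, rfl, rfl, Or.inl (Prod.ext (by omega) (by omega))⟩)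
  · exact Or.inr ((pvEdges_mem grid m _ _).mpr
      ⟨q, p, hq, lq, hp, lp, rfl, rfl, Or.inl (Prod.ext (by omega) (by omega))⟩)
  · exact Or.inl ((pvEdges_mem grid m _ _).mpr
      ⟨p, q, hp, lp, hq, lq, rfl, rfl, Or.inr (Prod.ext (by omega) (by omega))⟩)
  · exact Or.inr ((pvEdges_mem grid m _ _).mpr
      ⟨q, p, hq, lq, hp, lp, rfl, rfl, Or.inr (Prod.ext (by omega) (by omega))⟩)

lemma pvReach_ER {grid : List String} {m : Int} {p q : Int × Int}
    (h : pvReach (pvLiveP grid) m p q) :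
    pvER (pvEdges grid m) (pvIdx m p) (pvIdx m q) := by
  induction h with
  | refl => exact Relation.EqvGen.refl _
  | tail _ hadj ih =>
    refine Relation.EqvGen.trans _ _ _ ih ?_
    rcases pvAdj_edge hadj with he | he
    · exact Relation.EqvGen.rel _ _ he
    · exact Relation.EqvGen.symm _ _ (Relation.EqvGen.rel _ _ he)

lemma pvER_cases {grid : List String} {m : Int} {x y : Int}
    (h : pvER (pvEdges grid m) x y) :
    x = y ∨ ∃ p q : Int × Int, pvIn m p ∧ pvLiveP grid p ∧ pvIn m q ∧ pvLiveP grid q ∧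
      x = pvIdx m p ∧ y = pvIdx m q ∧ pvReach (pvLiveP grid) m p q := by
  induction h with
  | rel a b hab =>
    obtain ⟨p, q, hp, lp, hq, lq, hx, hy, hdir⟩ := (pvEdges_mem grid m a b).mp hab
    refine Or.inr ⟨p, q, hp, lp, hq, lq, hx, hy, Relation.ReflTransGen.single ?_⟩
    refine ⟨hp, hq, lp, lq, ?_⟩
    rcases hdir with rfl | rfl
    · exact Or.inl ⟨by simp, by simp⟩
    · exact Or.inr (Or.inr (Or.inl ⟨by simp, by simp⟩))
  | refl a => exact Or.inl rfl
  | symm a b _ ih =>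
    rcases ih with rfl | ⟨p, q, hp, lp, hq, lq, hx, hy, hr⟩
    · exact Or.inl rfl
    · exact Or.inr ⟨q, p, hq, lq, hp, lp, hy, hx, pvReach_symm hr⟩
  | trans a b c _ _ ih1 ih2 =>
    rcases ih1 with rfl | ⟨p1, q1, hp1, lp1, hq1, lq1, hx1, hy1, hr1⟩
    · exact ih2
    · rcases ih2 with rfl | ⟨p2, q2, hp2, lp2, hq2, lq2, hx2, hy2, hr2⟩
      · exact Or.inr ⟨p1, q1, hp1, lp1, hq1, lq1, hx1, hy1, hr1⟩
      · have hqp : q1 = p2 := pvIdx_inj hq1 hp2 (by omega)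
        exact Or.inr ⟨p1, q2, hp1, lp1, hq2, lq2, hx1, hy2,
          Relation.ReflTransGen.trans hr1 (hqp ▸ hr2)⟩

-- inverse of pvIdx on the board
def pvUnidx (m v : Int) : Int × Int := (v / m, v % m)

lemma pvUnidx_idx {m : Int} {p : Int × Int} (hp : pvIn m p) :
    pvUnidx m (pvIdx m p) = p := by
  obtain ⟨h1, h2, h3, h4⟩ := hp
  have hm : m ≠ 0 := by omega
  unfold pvUnidx pvIdx
  have hcomm : p.1 * m + p.2 = p.2 + p.1 * m := by ring
  rw [hcomm]
  have hdiv : (p.2 + p.1 * m) / m = p.1 := by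
    rw [Int.add_mul_ediv_right _ _ hm, Int.ediv_eq_zero_of_lt h3 h4]
    omega
  have hmod : (p.2 + p.1 * m) % m = p.2 := by
    rw [Int.add_mul_emod_self_right]
    exact Int.emod_eq_of_lt h3 h4
  rw [hdiv, hmod]

-- ---- both counts are the number of regions: an explicit bijection ----
lemma pvCount_eq (grid : List String) :
    ((pvScan (3*(grid.length:Int))).countP (pvFRb grid (3*(grid.length:Int))))
      = ((pvScan (3*(grid.length:Int))).countP (fun p =>
          decide (pvLiveB grid p.1 p.2 = true ∧
            pvPar (pvParentF grid (3*(grid.length:Int))) (pvIdx (3*(grid.length:Int)) p)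
              = pvIdx (3*(grid.length:Int)) p))) := by
  have hm : (0:Int) ≤ 3*(grid.length:Int) := by positivity
  obtain ⟨hinvF, hlenF⟩ := pvParentF_inv grid (m := 3*(grid.length:Int)) hm
  obtain ⟨hgF, h2F, h3F, h4F⟩ := hinvF
  have hbnd : ∀ p : Int × Int, pvIn (3*(grid.length:Int)) p →
      0 ≤ pvIdx (3*(grid.length:Int)) p ∧
      pvIdx (3*(grid.length:Int)) p < ((pvParentF grid (3*(grid.length:Int))).length : Int) := by
    intro p hp
    have := pvIdx_bounds hp
    rw [hlenF]
    exact this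
  -- the live root pixel of p's region
  have hRoot : ∀ p : Int × Int, pvIn (3*(grid.length:Int)) p → pvLiveP grid p →
      ∃ q : Int × Int, pvIn (3*(grid.length:Int)) q ∧ pvLiveP grid q ∧
        pvReach (pvLiveP grid) (3*(grid.length:Int)) p q ∧
        pvFind (pvParentF grid (3*(grid.length:Int))) (pvIdx (3*(grid.length:Int)) p)
          = pvIdx (3*(grid.length:Int)) q := by
    intro p hp lp
    have hb := hbnd p hp
    have hER := pvFind_ER hgF h2F (pvIdx (3*(grid.length:Int)) p).toNat _ hb.1 hb.2 (le_refl _)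
    rcases pvER_cases hER with heq | ⟨p', q', hp', lp', hq', lq', hx', hy', hr'⟩
    · exact ⟨p, hp, lp, Relation.ReflTransGen.refl, heq.symm⟩
    · have hpp : p' = p := pvIdx_inj hp' hp hx'.symm
      rw [hpp] at hr'
      exact ⟨q', hq', lq', hr', hy'⟩
  have hmemA : ∀ p : Int × Int,
      p ∈ ((pvScan (3*(grid.length:Int))).filter (pvFRb grid (3*(grid.length:Int)))).toFinset
        ↔ pvFR grid (3*(grid.length:Int)) p := by
    intro p
    rw [List.mem_toFinset, List.mem_filter]
    constructor
    · rintro ⟨-, hfr⟩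
      unfold pvFRb at hfr
      exact @of_decide_eq_true _ (Classical.propDecidable _) hfr
    · intro hfr
      refine ⟨(pvScan_mem _ p).mpr hfr.1, ?_⟩
      unfold pvFRb
      exact @decide_eq_true _ (Classical.propDecidable _) hfr
  have hmemB : ∀ q : Int × Int,
      q ∈ ((pvScan (3*(grid.length:Int))).filter (fun p =>
          decide (pvLiveB grid p.1 p.2 = true ∧
            pvPar (pvParentF grid (3*(grid.length:Int))) (pvIdx (3*(grid.length:Int)) p)
              = pvIdx (3*(grid.length:Int)) p))).toFinset
        ↔ pvIn (3*(grid.length:Int)) q ∧ pvLiveP grid q ∧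
            pvPar (pvParentF grid (3*(grid.length:Int))) (pvIdx (3*(grid.length:Int)) q)
              = pvIdx (3*(grid.length:Int)) q := by
    intro q
    rw [List.mem_toFinset, List.mem_filter, decide_eq_true_iff]
    constructor
    · rintro ⟨hs, h1, h2⟩
      exact ⟨(pvScan_mem _ q).mp hs, h1, h2⟩
    · rintro ⟨hin, h1, h2⟩
      exact ⟨(pvScan_mem _ q).mpr hin, h1, h2⟩
  rw [List.countP_eq_length_filter, List.countP_eq_length_filter,
    ← List.toFinset_card_of_nodup ((pvScan_nodup _).filter _),
    ← List.toFinset_card_of_nodup ((pvScan_nodup _).filter _)]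
  refine Finset.card_bij
    (fun p _ => pvUnidx (3*(grid.length:Int))
      (pvFind (pvParentF grid (3*(grid.length:Int))) (pvIdx (3*(grid.length:Int)) p)))
    ?_ ?_ ?_
  · -- maps FirstReps to live roots
    intro p hp
    dsimp only
    obtain ⟨hpin, lp, -⟩ := (hmemA p).mp hp
    obtain ⟨q, hq, lq, hr, hf⟩ := hRoot p hpin lp
    rw [hf, pvUnidx_idx hq, hmemB]
    refine ⟨hq, lq, ?_⟩
    have hroot := pvFind_root hgF (pvIdx (3*(grid.length:Int)) p).toNat _
      (hbnd p hpin).1 (hbnd p hpin).2 (le_refl _)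
    rw [hf] at hroot
    exact hroot
  · -- injective: two FirstReps with the same root are in the same region
    intro p1 hp1 p2 hp2 heq
    dsimp only at heq
    obtain ⟨hin1, lp1, hfr1⟩ := (hmemA p1).mp hp1
    obtain ⟨hin2, lp2, hfr2⟩ := (hmemA p2).mp hp2
    obtain ⟨q1, hq1, lq1, hr1, hf1⟩ := hRoot p1 hin1 lp1
    obtain ⟨q2, hq2, lq2, hr2, hf2⟩ := hRoot p2 hin2 lp2
    rw [hf1, pvUnidx_idx hq1, hf2, pvUnidx_idx hq2] at heq
    have hfind : pvFind (pvParentF grid (3*(grid.length:Int))) (pvIdx (3*(grid.length:Int)) p1)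
        = pvFind (pvParentF grid (3*(grid.length:Int))) (pvIdx (3*(grid.length:Int)) p2) := by
      rw [hf1, hf2, heq]
    have hER := (pvFind_iff_ER ⟨hgF, h2F, h3F, h4F⟩ (hbnd p1 hin1).1 (hbnd p1 hin1).2
      (hbnd p2 hin2).1 (hbnd p2 hin2).2).mp hfind
    rcases pvER_cases hER with hid | ⟨p1', p2', hp1', lp1', hp2', lp2', hx', hy', hr'⟩
    · exact pvIdx_inj hin1 hin2 hid
    · have e1 : p1' = p1 := pvIdx_inj hp1' hin1 hx'.symm
      have e2 : p2' = p2 := pvIdx_inj hp2' hin2 hy'.symm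
      rw [e1, e2] at hr'
      have h12 := hfr2 p1 hin1 lp1 hr'
      have h21 := hfr1 p2 hin2 lp2 (pvReach_symm hr')
      exact pvIdx_inj hin1 hin2 (by omega)
  · -- surjective: every live root's region has a FirstRep
    intro q hq
    obtain ⟨hqin, lq, hqroot⟩ := (hmemB q).mp hq
    have hqD : q ∈ ((pvScan (3*(grid.length:Int))).filter (fun r =>
        @decide (pvIn (3*(grid.length:Int)) r ∧ pvLiveP grid r ∧
          pvReach (pvLiveP grid) (3*(grid.length:Int)) r q)
          (Classical.propDecidable _))).toFinset := by
      rw [List.mem_toFinset, List.mem_filter]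
      exact ⟨(pvScan_mem _ q).mpr hqin,
        @decide_eq_true _ (Classical.propDecidable _) ⟨hqin, lq, Relation.ReflTransGen.refl⟩⟩
    obtain ⟨p, hpD, hmin⟩ := Finset.exists_min_image _ (pvIdx (3*(grid.length:Int))) ⟨q, hqD⟩
    rw [List.mem_toFinset, List.mem_filter] at hpD
    obtain ⟨hpscan, hpdec⟩ := hpD
    obtain ⟨hpin, lp, hpq⟩ := @of_decide_eq_true _ (Classical.propDecidable _) hpdec
    have hFRp : pvFR grid (3*(grid.length:Int)) p := by
      refine ⟨hpin, lp, ?_⟩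
      intro r hrin lr hrp
      refine hmin r ?_
      rw [List.mem_toFinset, List.mem_filter]
      exact ⟨(pvScan_mem _ r).mpr hrin,
        @decide_eq_true _ (Classical.propDecidable _)
          ⟨hrin, lr, Relation.ReflTransGen.trans hrp hpq⟩⟩
    refine ⟨p, (hmemA p).mpr hFRp, ?_⟩
    dsimp only
    have hfpq : pvFind (pvParentF grid (3*(grid.length:Int))) (pvIdx (3*(grid.length:Int)) p)
        = pvIdx (3*(grid.length:Int)) q := by
      have h1 := pvER_find h3F (pvReach_ER hpq)
      have h2 := pvFind_fix hgF (hbnd q hqin).1 (hbnd q hqin).2 hqroot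
      rw [h1, h2]
    rw [hfpq, pvUnidx_idx hqin]

lemma regionsBySlashes_eq (grid : List String) :
    regionsBySlashes grid = regionsBySlashes_alt grid := by
  rw [pvA_count, pvB_count]
  exact_mod_cast pvCount_eq grid

-- ===== VERDICT (by name: the statement is the Claim_ definition above) =====
theorem regionsBySlashes_spec : Claim_equal_regionsBySlashes := by
  intro grid _ _
  unfold Spec_regionsBySlashes
  exact regionsBySlashes_eq grid
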